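-- pv_equiv track=rewrite | github.com/mohammadfaiizan/ProjectI | DSA/Problem/Graph/04_Union_Find_DSU/952_Largest_Component_Size_by_Common_Factor.py | largestComponentSize_approach4_optimized_union_find
-- ===== SOURCE A (Python) =====
-- from typing import List
--
-- def largestComponentSize_approach4_optimized_union_find(nums: List[int]) -> int:
--     """
--     Approach 4: Optimized Union-Find with Factor Caching
--
--     Cache factors to avoid recomputation and optimize Union-Find.
--
--     Time: O(N * sqrt(M))
--     Space: O(N + F)
--     """
--     # Cache for memoizing prime factors
--     factor_cache = {}
--
--     def get_prime_factors_cached(n):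
--         """Get prime factors with caching"""
--         if n in factor_cache:
--             return factor_cache[n]
--
--         original_n = n
--         factors = set()
--
--         # Check for factor 2
--         if n % 2 == 0:
--             factors.add(2)
--             while n % 2 == 0:
--                 n //= 2
--
--         # Check odd factors
--         i = 3
--         while i * i <= n:
--             if n % i == 0:
--                 factors.add(i)
--                 while n % i == 0:
--                     n //= i
--             i += 2
--
--         if n > 1:
--             factors.add(n)
--
--         factor_cache[original_n] = factors
--         return factors
--
--     # Union-Find with factor-based unions
--     parent = list(range(len(nums)))
--     size = [1] * len(nums)
--
--     def find(x):
--         if parent[x] != x: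
--             parent[x] = find(parent[x])
--         return parent[x]
--
--     def union(x, y):
--         root_x, root_y = find(x), find(y)
--         if root_x == root_y:
--             return
--
--         if size[root_x] < size[root_y]:
--             root_x, root_y = root_y, root_x
--
--         parent[root_y] = root_x
--         size[root_x] += size[root_y]
--
--     # Map factors to first occurrence
--     factor_to_first = {}
--
--     for i, num in enumerate(nums):
--         prime_factors = get_prime_factors_cached(num)
--
--         for prime in prime_factors:
--             if prime in factor_to_first:
--                 union(i, factor_to_first[prime])
--             else:
--                 factor_to_first[prime] = i
--
--     # Find maximum component size
--     return max(size[find(i)] for i in range(len(nums)))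
-- ===== SOURCE B (Python) =====
-- from typing import List
--
-- def largestComponentSize_approach4_optimized_union_find(nums: List[int]) -> int:
--     """
--     Alternative: merge components represented directly as sets of primes with a
--     member count, instead of a union-find over indices.
--     """
--     def prime_factors(n):
--         factors = set()
--         if n % 2 == 0:
--             factors.add(2)
--             while n % 2 == 0:
--                 n //= 2
--         i = 3
--         while i * i <= n:
--             if n % i == 0:
--                 factors.add(i)
--                 while n % i == 0:
--                     n //= i
--             i += 2
--         if n > 1:
--             factors.add(n)
--         return factors
--
--     comps = []            # list of (set_of_primes, member_count)
--     has_singleton = False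
--     for num in nums:
--         primes = prime_factors(num)
--         if not primes:
--             has_singleton = True
--             continue
--         touching = [c for c in comps if any(p in c[0] for p in primes)]
--         rest = [c for c in comps if not any(p in c[0] for p in primes)]
--         merged, total = set(primes), 1
--         for ps, c in touching:
--             merged |= ps
--             total += c
--         comps = rest + [(merged, total)]
--     best = max((c for _, c in comps), default=0)
--     if has_singleton:
--         best = max(best, 1)
--     return best
-- ===== Notes on version B (the rewrite author's own statement) =====
-- stated objective: alternative
-- what changed: Replaces the index-keyed union-find (path compression, union by size, factor-to-first-index dict) by direct component merging: components are kept as (set-of-primes, member-count) pairs and each number merges every component that shares one of its prime factors; the same sqrt trial-division factorization is kept.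
import Mathlib
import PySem

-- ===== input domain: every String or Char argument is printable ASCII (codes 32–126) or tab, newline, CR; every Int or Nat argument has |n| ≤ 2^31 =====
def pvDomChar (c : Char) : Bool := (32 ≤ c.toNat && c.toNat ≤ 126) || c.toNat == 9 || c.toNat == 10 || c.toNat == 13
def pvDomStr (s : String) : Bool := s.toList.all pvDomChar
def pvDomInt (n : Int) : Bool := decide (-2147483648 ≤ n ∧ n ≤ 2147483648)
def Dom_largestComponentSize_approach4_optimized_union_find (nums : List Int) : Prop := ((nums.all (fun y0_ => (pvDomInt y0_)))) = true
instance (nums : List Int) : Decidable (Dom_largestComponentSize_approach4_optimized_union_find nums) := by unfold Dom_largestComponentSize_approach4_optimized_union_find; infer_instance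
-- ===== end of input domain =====

-- B replaces the index-keyed union-find (path compression, union by size) by direct merging of
-- components kept as (set-of-primes, member-count) pairs; same sqrt trial-division factorization.
-- Not faster; a structurally different algorithm.

-- ===== PORT A =====
-- shared factorization helpers ('while n % p == 0: n //= p' etc., with enough fuel to be exact
-- for every n != 0; on n = 0 the Python loops forever, which Pre_ excludes)
def pvDivOut (fuel : Nat) (p n : Int) : Int :=
  match fuel with
  | 0 => n
  | f+1 => if PySem.Int.mod n p = 0 then pvDivOut f p (PySem.Int.floordiv n p) else n

def pvOddLoop (fuel : Nat) (i n : Int) (acc : PySem.Set Int) : PySem.Set Int × Int :=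
  match fuel with
  | 0 => (acc, n)
  | f+1 =>
    if i * i ≤ n then
      if PySem.Int.mod n i = 0 then
        pvOddLoop f (i+2) (pvDivOut (n.natAbs + 1) i n) (PySem.Set.add acc i)
      else pvOddLoop f (i+2) n acc
    else (acc, n)

def pvFactors (n0 : Int) : PySem.Set Int :=
  let st :=
    if PySem.Int.mod n0 2 = 0 then (PySem.Set.add PySem.Set.empty 2, pvDivOut (n0.natAbs + 1) 2 n0)
    else (PySem.Set.empty, n0)
  let st2 := pvOddLoop (st.2.natAbs + 2) 3 st.2 st.1
  if 1 < st2.2 then PySem.Set.add st2.1 st2.2 else st2.1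

def pvFind : Nat → List Int → Int → Option (Int × List Int)
  | 0, _, _ => none
  | f+1, parent, x =>
    match PySem.List.pyGet? parent x with
    | none => none
    | some px =>
      if px ≠ x then
        match pvFind f parent px with
        | none => none
        | some rp => some (rp.1, PySem.List.pySetD rp.2 x rp.1)
      else some (x, parent)

def pvUnion (parent size : List Int) (x y : Int) : Option (List Int × List Int) :=
  match pvFind (parent.length + 1) parent x with
  | none => none
  | some rp =>
    match pvFind (rp.2.length + 1) rp.2 y with
    | none => none
    | some rq =>
      if rp.1 = rq.1 then some (rq.2, size)
      else
        match PySem.List.pyGet? size rp.1, PySem.List.pyGet? size rq.1 with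
        | some sx, some sy =>
          if sx < sy then some (PySem.List.pySetD rq.2 rp.1 rq.1, PySem.List.pySetD size rq.1 (sy + sx))
          else some (PySem.List.pySetD rq.2 rq.1 rp.1, PySem.List.pySetD size rp.1 (sx + sy))
        | _, _ => none

def pvInnerStep (i : Int) (ost2 : Option (List Int × List Int × PySem.Dict Int Int)) (p : Int) :
    Option (List Int × List Int × PySem.Dict Int Int) :=
  match ost2 with
  | none => none
  | some (parent, size, first) =>
    match first.get? p with
    | some j =>
      match pvUnion parent size i j with
      | none => none
      | some ps => some (ps.1, ps.2, first)
    | none => some (parent, size, first.insert p i)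

def pvStepA (st : Option (PySem.Dict Int (PySem.Set Int) × List Int × List Int × PySem.Dict Int Int))
    (iv : Int × Int) :
    Option (PySem.Dict Int (PySem.Set Int) × List Int × List Int × PySem.Dict Int Int) :=
  match st with
  | none => none
  | some (cache, parent, size, first) =>
    let res : PySem.Set Int × PySem.Dict Int (PySem.Set Int) :=
      match cache.get? iv.2 with
      | some fs => (fs, cache)
      | none => (pvFactors iv.2, cache.insert iv.2 (pvFactors iv.2))
    (res.1.foldl (pvInnerStep iv.1) (some (parent, size, first))).map (fun t => (res.2, t))

def pvMaxStep (size : List Int) (acc : Option (Option Int × List Int)) (i : Int) :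
    Option (Option Int × List Int) :=
  match acc with
  | none => none
  | some bp =>
    match pvFind (bp.2.length + 1) bp.2 i with
    | none => none
    | some rp =>
      match PySem.List.pyGet? size rp.1 with
      | none => none
      | some v =>
        match bp.1 with
        | none => some (some v, rp.2)
        | some b => some (some (max b v), rp.2)

def largestComponentSize_approach4_optimized_union_find (nums : List Int) : Int :=
  let n : Int := (nums.length : Int)
  let st := (PySem.List.enumerate nums 0).foldl pvStepA
    (some (PySem.Dict.empty, PySem.List.pyRange 0 n 1, PySem.List.pyRepeat [(1 : Int)] n, PySem.Dict.empty))
  match st with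
  | none => 0
  | some (_, parent, size, _) =>
    match (PySem.List.pyRange 0 n 1).foldl (pvMaxStep size) (some ((none : Option Int), parent)) with
    | some (some b, _) => b
    | _ => 0

-- ===== PORT B =====
def pvStepB (st : List (PySem.Set Int × Int) × Bool) (num : Int) : List (PySem.Set Int × Int) × Bool :=
  let comps := st.1
  let primes := pvFactors num
  if primes.isEmpty then (comps, true)
  else
    let touching := comps.filter (fun c => primes.any (fun p => PySem.Set.contains c.1 p))
    let rest := comps.filter (fun c => !(primes.any (fun p => PySem.Set.contains c.1 p)))
    let mt := touching.foldl (fun (mt : PySem.Set Int × Int) c => (PySem.Set.union mt.1 c.1, mt.2 + c.2)) (primes, 1)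
    (rest ++ [mt], st.2)

def largestComponentSize_approach4_optimized_union_find_alt (nums : List Int) : Int :=
  let st := nums.foldl pvStepB ([], false)
  let best := PySem.List.maxD (st.1.map (fun c => c.2)) (fun x => x) 0
  if st.2 then max best 1 else best

-- ===== PRECONDITION & SPEC =====
-- Pre_ excludes the empty list (A's max over an empty generator raises ValueError) and lists
-- containing 0 (A's factorization loop 'while n % 2 == 0: n //= 2' never terminates on 0).
def Pre_largestComponentSize_approach4_optimized_union_find (nums : List Int) : Prop :=
  nums ≠ [] ∧ (0 : Int) ∉ nums
instance (nums : List Int) : Decidable (Pre_largestComponentSize_approach4_optimized_union_find nums) := by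
  unfold Pre_largestComponentSize_approach4_optimized_union_find; infer_instance

def pvWitness_largestComponentSize_approach4_optimized_union_find : List Int := [4, 6, 15, 35, 1, 7]

def Spec_largestComponentSize_approach4_optimized_union_find (nums : List Int) (out : Int) : Prop :=
  out = largestComponentSize_approach4_optimized_union_find_alt nums
instance (nums : List Int) (out : Int) : Decidable (Spec_largestComponentSize_approach4_optimized_union_find nums out) := by
  unfold Spec_largestComponentSize_approach4_optimized_union_find; infer_instance

-- ===== CLAIM (what is proved, stated in full; the proofs are below) =====
def Claim_equal_largestComponentSize_approach4_optimized_union_find : Prop :=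
  ∀ (nums : List Int), Dom_largestComponentSize_approach4_optimized_union_find nums →
    Pre_largestComponentSize_approach4_optimized_union_find nums →
    Spec_largestComponentSize_approach4_optimized_union_find nums (largestComponentSize_approach4_optimized_union_find nums)

-- ===== LEMMAS AND PROOFS =====

def pstep (parent : List Int) (x : Int) : Int := (PySem.List.pyGet? parent x).getD x
def iterp (parent : List Int) (k : Nat) (x : Int) : Int := (pstep parent)^[k] x
def isRoot (parent : List Int) (x : Int) : Prop := pstep parent x = x
def inR (parent : List Int) (x : Int) : Prop := 0 ≤ x ∧ x < (parent.length : Int)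
def bounded (parent : List Int) : Prop := ∀ x, inR parent x → inR parent (pstep parent x)
def reach (parent : List Int) : Prop := ∀ x, inR parent x → ∃ k, isRoot parent (iterp parent k x)
def wfp (parent : List Int) : Prop := bounded parent ∧ reach parent
def rootOf (parent : List Int) (x : Int) : Int := iterp parent parent.length x

lemma pyGet?_inR {p : List Int} {x : Int} (h : inR p x) :
    PySem.List.pyGet? p x = some (pstep p x) := by
  obtain ⟨h0, h1⟩ := h
  have hx : x.toNat < p.length := by omega
  have hcast : PySem.List.pyGet? p x = p[x.toNat]? := by
    have := PySem.List.pyGet?_natCast p x.toNat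
    rwa [Int.toNat_of_nonneg h0] at this
  rw [hcast, List.getElem?_eq_getElem hx]
  simp [pstep, hcast, List.getElem?_eq_getElem hx]

lemma pstep_eq_getElem {p : List Int} {x : Int} (h : inR p x) :
    pstep p x = p[x.toNat]'(by obtain ⟨h0, h1⟩ := h; omega) := by
  obtain ⟨h0, h1⟩ := h
  have hx : x.toNat < p.length := by omega
  have hcast : PySem.List.pyGet? p x = p[x.toNat]? := by
    have := PySem.List.pyGet?_natCast p x.toNat
    rwa [Int.toNat_of_nonneg h0] at this
  simp [pstep, hcast, List.getElem?_eq_getElem hx]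

lemma pstep_set {p : List Int} {j r : Int} (hj : inR p j) {x : Int} (hx : inR p x) :
    pstep (PySem.List.pySetD p j r) x = if x = j then r else pstep p x := by
  obtain ⟨hj0, hj1⟩ := hj
  obtain ⟨hx0, hx1⟩ := hx
  have hset : PySem.List.pySetD p j r = p.set j.toNat r := PySem.List.pySetD_of_nonneg p r hj0
  have hxl : x.toNat < (p.set j.toNat r).length := by simp; omega
  have h1 : pstep (PySem.List.pySetD p j r) x = (p.set j.toNat r)[x.toNat]'hxl := by
    rw [hset]
    exact pstep_eq_getElem ⟨hx0, by simp; omega⟩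
  rw [h1, List.getElem_set]
  by_cases hxj : x = j
  · subst hxj; simp
  · have hne : j.toNat ≠ x.toNat := by omega
    rw [if_neg hne, if_neg hxj, pstep_eq_getElem ⟨hx0, hx1⟩]

lemma length_pySetD' (p : List Int) (j r : Int) : (PySem.List.pySetD p j r).length = p.length :=
  PySem.List.length_pySetD p j r

lemma isRoot_iterp {p : List Int} {z : Int} (hz : isRoot p z) (k : Nat) : iterp p k z = z := by
  induction k with
  | zero => rfl
  | succ m ih => rw [iterp, Function.iterate_succ_apply, hz]; exact ih

lemma iterp_succ (p : List Int) (k : Nat) (x : Int) :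
    iterp p (k+1) x = iterp p k (pstep p x) := by
  rw [iterp, Function.iterate_succ_apply]; rfl

lemma iterp_succ' (p : List Int) (k : Nat) (x : Int) :
    iterp p (k+1) x = pstep p (iterp p k x) := by
  rw [iterp, Function.iterate_succ_apply']; rfl

lemma iterp_add (p : List Int) (a b : Nat) (x : Int) :
    iterp p (a + b) x = iterp p b (iterp p a x) := by
  rw [iterp, Nat.add_comm, Function.iterate_add_apply]; rfl

lemma bounded_iterp {p : List Int} (hb : bounded p) {x : Int} (hx : inR p x) (k : Nat) :
    inR p (iterp p k x) := by
  induction k with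
  | zero => exact hx
  | succ m ih => rw [iterp_succ']; exact hb _ ih

lemma reach_bound {p : List Int} (hb : bounded p) {x : Int} (hx : inR p x)
    (hr : ∃ k, isRoot p (iterp p k x)) : isRoot p (rootOf p x) := by
  classical
  set n := p.length with hn
  have hfind := Nat.find_spec hr
  set k0 := Nat.find hr with hk0
  have hinj : ∀ a b : Nat, a < b → b ≤ k0 → iterp p a x ≠ iterp p b x := by
    intro a b hab hbk heq
    have e1 : iterp p (a + (k0 - b)) x = iterp p (k0 - b) (iterp p a x) := iterp_add p a (k0 - b) x
    have e2 : iterp p (b + (k0 - b)) x = iterp p (k0 - b) (iterp p b x) := iterp_add p b (k0 - b) x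
    have e3 : iterp p (a + (k0 - b)) x = iterp p k0 x := by
      rw [e1, heq, ← e2]; congr 1; omega
    have hri : isRoot p (iterp p (a + (k0 - b)) x) := by rw [e3]; exact hfind
    exact Nat.find_min hr (by omega) hri
  have hk0n : k0 ≤ n := by
    by_contra hgt
    have hgt : n < k0 := by omega
    have hf : ∀ t : Fin (k0 + 1), (iterp p t.1 x).toNat < n := by
      intro t
      have := bounded_iterp hb hx t.1
      unfold inR at this; omega
    let f : Fin (k0 + 1) → Fin n := fun t => ⟨(iterp p t.1 x).toNat, hf t⟩
    have hfi : Function.Injective f := by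
      intro a b hab
      have hval : iterp p a.1 x = iterp p b.1 x := by
        have ha := (bounded_iterp hb hx a.1).1
        have hbb := (bounded_iterp hb hx b.1).1
        have := congrArg Fin.val hab
        simp only [f] at this
        omega
      by_contra hne
      rcases Nat.lt_or_ge a.1 b.1 with h | h
      · exact hinj a.1 b.1 h (by omega) hval
      rcases Nat.lt_or_ge b.1 a.1 with h2 | h2
      · exact hinj b.1 a.1 h2 (by omega) hval.symm
      · exact hne (Fin.ext (by omega))
    have := Fintype.card_le_of_injective f hfi
    simp at this
    omega
  have : rootOf p x = iterp p k0 x := by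
    rw [rootOf, ← hn]
    have : n = k0 + (n - k0) := by omega
    rw [this, iterp_add, isRoot_iterp hfind]
  rw [this]; exact hfind

lemma rootOf_isRoot {p : List Int} (hwf : wfp p) {x : Int} (hx : inR p x) :
    isRoot p (rootOf p x) := reach_bound hwf.1 hx (hwf.2 x hx)

lemma rootOf_inR {p : List Int} (hwf : wfp p) {x : Int} (hx : inR p x) :
    inR p (rootOf p x) := bounded_iterp hwf.1 hx p.length

lemma rootOf_eq_of_isRoot {p : List Int} {x : Int} (hx : isRoot p x) : rootOf p x = x :=
  isRoot_iterp hx p.length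

lemma rootOf_pstep {p : List Int} (hwf : wfp p) {x : Int} (hx : inR p x) :
    rootOf p (pstep p x) = rootOf p x := by
  have h1 : rootOf p (pstep p x) = iterp p (p.length + 1) x := by
    rw [rootOf]
    have : p.length + 1 = 1 + p.length := by omega
    rw [this, iterp_add]; rfl
  rw [h1]
  have := iterp_succ' p p.length x
  rw [this]
  exact rootOf_isRoot hwf hx

lemma root_unique {p : List Int} (hwf : wfp p) {x : Int} (hx : inR p x) {k : Nat}
    (hk : isRoot p (iterp p k x)) : iterp p k x = rootOf p x := by
  set n := p.length with hn
  rcases Nat.le_total k n with h | h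
  · have : rootOf p x = iterp p (k + (n - k)) x := by
      rw [rootOf, ← hn]; congr 1; omega
    rw [this, iterp_add, isRoot_iterp hk]
  · have hroot := rootOf_isRoot hwf hx
    have : iterp p k x = iterp p (n + (k - n)) x := by congr 1; omega
    rw [this, iterp_add]
    exact isRoot_iterp hroot _

lemma pyGet?_some_of_inR {xs : List Int} {w : Int} (h0 : 0 ≤ w) (h1 : w < (xs.length : Int)) :
    PySem.List.pyGet? xs w = some (PySem.List.pyGetD xs w 0) := by
  have hx : w.toNat < xs.length := by omega
  have hcast := PySem.List.pyGet?_natCast xs w.toNat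
  rw [Int.toNat_of_nonneg h0] at hcast
  rw [hcast, List.getElem?_eq_getElem hx, PySem.List.pyGetD_eq_getElem xs 0 h0 h1]

lemma pyGetD_pySetD_int {xs : List Int} {j : Int} (hj0 : 0 ≤ j) (hj1 : j < (xs.length : Int))
    {w : Int} (hw0 : 0 ≤ w) (v : Int) :
    PySem.List.pyGetD (PySem.List.pySetD xs j v) w 0 =
      if w = j then v else PySem.List.pyGetD xs w 0 := by
  rw [PySem.List.pySetD_of_nonneg xs v hj0]
  by_cases hw1 : w < (xs.length : Int)
  · have hlen : w < ((xs.set j.toNat v).length : Int) := by simp; omega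
    rw [PySem.List.pyGetD_eq_getElem _ 0 hw0 hlen, PySem.List.pyGetD_eq_getElem xs 0 hw0 hw1,
      List.getElem_set]
    by_cases hwj : w = j
    · subst hwj; simp
    · have : j.toNat ≠ w.toNat := by omega
      rw [if_neg this, if_neg hwj]
  · have hwj : w ≠ j := by omega
    rw [if_neg hwj]
    have h1 : PySem.List.pyGet? (xs.set j.toNat v) w = none := by
      unfold PySem.List.pyGet? PySem.List.pyIdx?
      rw [if_pos hw0, if_neg (by simp; omega)]
      rfl
    have h2 : PySem.List.pyGet? xs w = none := by
      unfold PySem.List.pyGet? PySem.List.pyIdx?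
      rw [if_pos hw0, if_neg (by omega)]
      rfl
    simp [PySem.List.pyGetD, h1, h2]

lemma redirect {p : List Int} (hwf : wfp p) {j r : Int} (hj : inR p j) (hr : inR p r)
    (hrroot : isRoot p r) (hcase : isRoot p j ∨ r = rootOf p j) :
    wfp (PySem.List.pySetD p j r) ∧
    (∀ y, inR p y → rootOf (PySem.List.pySetD p j r) y =
      if rootOf p y = rootOf p j then r else rootOf p y) := by
  classical
  set p' := PySem.List.pySetD p j r with hp'
  have hlen : p'.length = p.length := PySem.List.length_pySetD p j r
  have hinr : ∀ z, inR p' z ↔ inR p z := by intro z; unfold inR; rw [hlen]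
  have hps : ∀ x, inR p x → pstep p' x = if x = j then r else pstep p x := by
    intro x hx; exact pstep_set hj hx
  have hrootne : ∀ y, inR p y → rootOf p y ≠ rootOf p j → rootOf p y ≠ j := by
    intro y hy hc hyj
    by_cases hjr : isRoot p j
    · exact hc (by rw [hyj, rootOf_eq_of_isRoot hjr])
    · exact hjr (hyj ▸ rootOf_isRoot hwf hy)
  have htgt : ∀ y, inR p y →
      isRoot p' (if rootOf p y = rootOf p j then r else rootOf p y) ∧
      inR p (if rootOf p y = rootOf p j then r else rootOf p y) := by
    intro y hy
    by_cases hc : rootOf p y = rootOf p j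
    · rw [if_pos hc]
      refine ⟨?_, hr⟩
      unfold isRoot
      rw [hps r hr]
      by_cases hrj : r = j
      · rw [if_pos hrj]
      · rw [if_neg hrj]; exact hrroot
    · rw [if_neg hc]
      refine ⟨?_, rootOf_inR hwf hy⟩
      unfold isRoot
      rw [hps _ (rootOf_inR hwf hy), if_neg (hrootne y hy hc)]
      exact rootOf_isRoot hwf hy
  have key0 : ∀ y, inR p y → isRoot p y →
      ∃ m, iterp p' m y = (if rootOf p y = rootOf p j then r else rootOf p y) := by
    intro y hy hyroot
    have hyr : rootOf p y = y := rootOf_eq_of_isRoot hyroot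
    by_cases hyj : y = j
    · subst hyj
      rw [if_pos (by rw [hyr])]
      refine ⟨1, ?_⟩
      show pstep p' _ = r
      rw [hps _ hy, if_pos rfl]
    · by_cases hc : rootOf p y = rootOf p j
      · rcases hcase with hjr | hre
        · exfalso; apply hyj
          rw [← hyr, hc, rootOf_eq_of_isRoot hjr]
        · refine ⟨0, ?_⟩
          rw [if_pos hc]
          show y = r
          rw [hre, ← hc, hyr]
      · exact ⟨0, by rw [if_neg hc]; exact hyr.symm⟩
  have key : ∀ (k : Nat) (y : Int), inR p y → isRoot p (iterp p k y) →
      ∃ m, iterp p' m y = (if rootOf p y = rootOf p j then r else rootOf p y) := by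
    intro k
    induction k with
    | zero => intro y hy hroot; exact key0 y hy hroot
    | succ k ih =>
      intro y hy hroot
      by_cases hyroot : isRoot p y
      · exact key0 y hy hyroot
      · by_cases hyj : y = j
        · subst hyj
          rcases hcase with hjr | hre
          · exact absurd hjr hyroot
          · refine ⟨1, ?_⟩
            rw [if_pos rfl]
            show pstep p' _ = r
            rw [hps _ hy, if_pos rfl]
        · have hpy : inR p (pstep p y) := hwf.1 y hy
          have hroot' : isRoot p (iterp p k (pstep p y)) := by
            rw [← iterp_succ]; exact hroot
          obtain ⟨m, hm⟩ := ih (pstep p y) hpy hroot'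
          refine ⟨m + 1, ?_⟩
          have h1 : iterp p' (m+1) y = iterp p' m (pstep p' y) := iterp_succ p' m y
          rw [h1, hps y hy, if_neg hyj, hm, rootOf_pstep hwf hy]
  have hbounded : bounded p' := by
    intro x hx'
    have hx : inR p x := (hinr x).1 hx'
    rw [hps x hx]
    by_cases hxj : x = j
    · rw [if_pos hxj]; exact (hinr r).2 hr
    · rw [if_neg hxj]; exact (hinr _).2 (hwf.1 x hx)
  have hreach : reach p' := by
    intro y hy'
    have hy : inR p y := (hinr y).1 hy'
    obtain ⟨k, hk⟩ := hwf.2 y hy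
    obtain ⟨m, hm⟩ := key k y hy hk
    exact ⟨m, by rw [hm]; exact (htgt y hy).1⟩
  have hwf' : wfp p' := ⟨hbounded, hreach⟩
  refine ⟨hwf', ?_⟩
  intro y hy
  obtain ⟨k, hk⟩ := hwf.2 y hy
  obtain ⟨m, hm⟩ := key k y hy hk
  have : isRoot p' (iterp p' m y) := by rw [hm]; exact (htgt y hy).1
  have := root_unique hwf' ((hinr y).2 hy) this
  rw [hm] at this
  exact this.symm

lemma find_spec : ∀ (f : Nat) (p : List Int) (x : Int), wfp p → inR p x →
    (∃ k, k < f ∧ isRoot p (iterp p k x)) →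
    ∃ p', pvFind f p x = some (rootOf p x, p') ∧ p'.length = p.length ∧ wfp p' ∧
      ∀ y, inR p y → rootOf p' y = rootOf p y := by
  intro f
  induction f with
  | zero => rintro p x _ _ ⟨k, hk, _⟩; omega
  | succ f ih =>
    rintro p x hwf hx ⟨k, hkf, hkroot⟩
    by_cases hroot : pstep p x = x
    · refine ⟨p, ?_, rfl, hwf, fun y _ => rfl⟩
      simp only [pvFind, pyGet?_inR hx, hroot]
      simp [rootOf_eq_of_isRoot hroot]
    · have hk0 : k ≠ 0 := by
        intro h; subst h; exact hroot hkroot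
      obtain ⟨k', rfl⟩ : ∃ k', k = k' + 1 := ⟨k - 1, by omega⟩
      have hpx : inR p (pstep p x) := hwf.1 x hx
      have hroot' : isRoot p (iterp p k' (pstep p x)) := by
        rw [← iterp_succ]; exact hkroot
      obtain ⟨p1, hfind1, hlen1, hwf1, hroots1⟩ := ih p (pstep p x) hwf hpx ⟨k', by omega, hroot'⟩
      have hinr1 : ∀ z, inR p1 z ↔ inR p z := by intro z; unfold inR; rw [hlen1]
      set R := rootOf p (pstep p x) with hRdef
      have hRx : R = rootOf p x := rootOf_pstep hwf hx
      have hRin : inR p R := hRdef ▸ rootOf_inR hwf hpx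
      have hRroot : isRoot p R := hRdef ▸ rootOf_isRoot hwf hpx
      have hj1 : inR p1 x := (hinr1 x).2 hx
      have hr1 : inR p1 R := (hinr1 R).2 hRin
      have hrroot1 : isRoot p1 R := by
        have h1 : rootOf p1 R = R := by
          rw [hroots1 R hRin]; exact rootOf_eq_of_isRoot hRroot
        have := rootOf_isRoot hwf1 hr1
        rwa [h1] at this
      have hcase1 : isRoot p1 x ∨ R = rootOf p1 x := by
        right; rw [hroots1 x hx, hRx]
      obtain ⟨hwf2, hform⟩ := redirect hwf1 hj1 hr1 hrroot1 hcase1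
      refine ⟨PySem.List.pySetD p1 x R, ?_, ?_, hwf2, ?_⟩
      · simp only [pvFind, pyGet?_inR hx]
        rw [if_pos hroot, hfind1]
        rw [hRx]
      · rw [length_pySetD', hlen1]
      · intro y hy
        have h1 := hform y ((hinr1 y).2 hy)
        rw [hroots1 y hy, hroots1 x hx] at h1
        rw [h1]
        by_cases hc : rootOf p y = rootOf p x
        · rw [if_pos hc, hRx, hc]
        · rw [if_neg hc]

lemma find_spec_len {p : List Int} {x : Int} (hwf : wfp p) (hx : inR p x) :
    ∃ p', pvFind (p.length + 1) p x = some (rootOf p x, p') ∧ p'.length = p.length ∧ wfp p' ∧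
      ∀ y, inR p y → rootOf p' y = rootOf p y :=
  find_spec (p.length + 1) p x hwf hx ⟨p.length, by omega, rootOf_isRoot hwf hx⟩

def SizeAt (size : List Int) (w : Int) : Int := PySem.List.pyGetD size w 0

lemma union_spec {p size : List Int} (hwf : wfp p) {x y : Int} (hx : inR p x) (hy : inR p y)
    (hlen : size.length = p.length) :
    ∃ p2 size2, pvUnion p size x y = some (p2, size2) ∧ p2.length = p.length ∧
      size2.length = p.length ∧ wfp p2 ∧
      ((rootOf p x = rootOf p y ∧ size2 = size ∧ (∀ z, inR p z → rootOf p2 z = rootOf p z)) ∨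
       (rootOf p x ≠ rootOf p y ∧ ∃ R, (R = rootOf p x ∨ R = rootOf p y) ∧
         (∀ z, inR p z → rootOf p2 z =
            if rootOf p z = rootOf p x ∨ rootOf p z = rootOf p y then R else rootOf p z) ∧
         (∀ w, 0 ≤ w → w ≠ R → SizeAt size2 w = SizeAt size w) ∧
         SizeAt size2 R = SizeAt size (rootOf p x) + SizeAt size (rootOf p y))) := by
  classical
  obtain ⟨p1, hf1, hlen1, hwf1, hroots1⟩ := find_spec_len hwf hx
  have hinr1 : ∀ z, inR p1 z ↔ inR p z := by intro z; unfold inR; rw [hlen1]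
  obtain ⟨p2a, hf2, hlen2, hwf2, hroots2⟩ := find_spec_len hwf1 ((hinr1 y).2 hy)
  have hinr2 : ∀ z, inR p2a z ↔ inR p z := by
    intro z; unfold inR; rw [hlen2, hlen1]
  have hry : rootOf p1 y = rootOf p y := hroots1 y hy
  set rx := rootOf p x with hrxdef
  set ry := rootOf p y with hrydef
  have hrxin : inR p rx := rootOf_inR hwf hx
  have hryin : inR p ry := rootOf_inR hwf hy
  have hrxroot : isRoot p rx := rootOf_isRoot hwf hx
  have hryroot : isRoot p ry := rootOf_isRoot hwf hy
  have hroots2' : ∀ z, inR p z → rootOf p2a z = rootOf p z := by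
    intro z hz; rw [hroots2 z ((hinr1 z).2 hz), hroots1 z hz]
  have hrxroot2 : isRoot p2a rx := by
    have h1 : rootOf p2a rx = rx := by
      rw [hroots2' rx hrxin]; exact rootOf_eq_of_isRoot hrxroot
    have := rootOf_isRoot hwf2 ((hinr2 rx).2 hrxin)
    rwa [h1] at this
  have hryroot2 : isRoot p2a ry := by
    have h1 : rootOf p2a ry = ry := by
      rw [hroots2' ry hryin]; exact rootOf_eq_of_isRoot hryroot
    have := rootOf_isRoot hwf2 ((hinr2 ry).2 hryin)
    rwa [h1] at this
  have hunfold : pvUnion p size x y =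
      (if rx = ry then some (p2a, size)
       else
        match PySem.List.pyGet? size rx, PySem.List.pyGet? size ry with
        | some sx, some sy =>
          if sx < sy then some (PySem.List.pySetD p2a rx ry, PySem.List.pySetD size ry (sy + sx))
          else some (PySem.List.pySetD p2a ry rx, PySem.List.pySetD size rx (sx + sy))
        | _, _ => none) := by
    unfold pvUnion
    rw [hf1]
    dsimp only
    rw [hlen1] at hf2
    rw [hlen1, hf2, hry]
  by_cases hxy : rx = ry
  · refine ⟨p2a, size, ?_, by omega, hlen, hwf2, Or.inl ⟨hxy, rfl, hroots2'⟩⟩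
    rw [hunfold, if_pos hxy]
  · have hsx := pyGet?_some_of_inR hrxin.1 (by rw [hlen]; exact hrxin.2)
    have hsy := pyGet?_some_of_inR hryin.1 (by rw [hlen]; exact hryin.2)
    have hsizelen : (size.length : Int) = (p.length : Int) := by rw [hlen]
    -- helper for either write direction
    have hmain : ∀ (jj rr : Int), jj = rx ∧ rr = ry ∨ jj = ry ∧ rr = rx →
        ∀ z, inR p z → rootOf (PySem.List.pySetD p2a jj rr) z =
          (if rootOf p z = rx ∨ rootOf p z = ry then rr else rootOf p z) := by
      rintro jj rr (⟨rfl, rfl⟩ | ⟨rfl, rfl⟩) z hz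
      · obtain ⟨_, hform⟩ := redirect hwf2 ((hinr2 rx).2 hrxin) ((hinr2 ry).2 hryin)
          hryroot2 (Or.inl hrxroot2)
        have h1 := hform z ((hinr2 z).2 hz)
        rw [hroots2' z hz, hroots2' rx hrxin, rootOf_eq_of_isRoot hrxroot] at h1
        rw [h1]
        by_cases hc : rootOf p z = rx
        · rw [if_pos hc, if_pos (Or.inl hc)]
        · rw [if_neg hc]
          by_cases hc2 : rootOf p z = ry
          · rw [if_pos (Or.inr hc2), hc2]
          · rw [if_neg (by tauto)]
      · obtain ⟨_, hform⟩ := redirect hwf2 ((hinr2 ry).2 hryin) ((hinr2 rx).2 hrxin)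
          hrxroot2 (Or.inl hryroot2)
        have h1 := hform z ((hinr2 z).2 hz)
        rw [hroots2' z hz, hroots2' ry hryin, rootOf_eq_of_isRoot hryroot] at h1
        rw [h1]
        by_cases hc : rootOf p z = ry
        · rw [if_pos hc, if_pos (Or.inr hc)]
        · rw [if_neg hc]
          by_cases hc2 : rootOf p z = rx
          · rw [if_pos (Or.inl hc2), hc2]
          · rw [if_neg (by tauto)]
    have hwfset : ∀ (jj rr : Int), jj = rx ∧ rr = ry ∨ jj = ry ∧ rr = rx →
        wfp (PySem.List.pySetD p2a jj rr) := by
      rintro jj rr (⟨rfl, rfl⟩ | ⟨rfl, rfl⟩)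
      · exact (redirect hwf2 ((hinr2 rx).2 hrxin) ((hinr2 ry).2 hryin)
          hryroot2 (Or.inl hrxroot2)).1
      · exact (redirect hwf2 ((hinr2 ry).2 hryin) ((hinr2 rx).2 hrxin)
          hrxroot2 (Or.inl hryroot2)).1
    by_cases hcmp : SizeAt size rx < SizeAt size ry
    · refine ⟨PySem.List.pySetD p2a rx ry, PySem.List.pySetD size ry (SizeAt size ry + SizeAt size rx),
        ?_, by rw [length_pySetD']; omega, by rw [length_pySetD', hlen], hwfset _ _ (Or.inl ⟨rfl, rfl⟩),
        Or.inr ⟨hxy, ry, Or.inr rfl, hmain _ _ (Or.inl ⟨rfl, rfl⟩), ?_, ?_⟩⟩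
      · rw [hunfold, if_neg hxy, hsx, hsy]
        dsimp only
        simp only [SizeAt] at hcmp ⊢
        rw [if_pos hcmp]
      · intro w hw0 hwne
        simp only [SizeAt]
        rw [pyGetD_pySetD_int (xs := size) hryin.1 (by rw [hlen]; exact hryin.2) hw0]
        rw [if_neg hwne]
      · simp only [SizeAt]
        rw [pyGetD_pySetD_int (xs := size) hryin.1 (by rw [hlen]; exact hryin.2) hryin.1, if_pos rfl]
        ring
    · refine ⟨PySem.List.pySetD p2a ry rx, PySem.List.pySetD size rx (SizeAt size rx + SizeAt size ry),
        ?_, by rw [length_pySetD']; omega, by rw [length_pySetD', hlen], hwfset _ _ (Or.inr ⟨rfl, rfl⟩),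
        Or.inr ⟨hxy, rx, Or.inl rfl, hmain _ _ (Or.inr ⟨rfl, rfl⟩), ?_, ?_⟩⟩
      · rw [hunfold, if_neg hxy, hsx, hsy]
        dsimp only
        simp only [SizeAt] at hcmp ⊢
        rw [if_neg hcmp]
      · intro w hw0 hwne
        simp only [SizeAt]
        rw [pyGetD_pySetD_int (xs := size) hrxin.1 (by rw [hlen]; exact hrxin.2) hw0]
        rw [if_neg hwne]
      · simp only [SizeAt]
        rw [pyGetD_pySetD_int (xs := size) hrxin.1 (by rw [hlen]; exact hrxin.2) hrxin.1, if_pos rfl]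

lemma inR_iff_of_len {p q : List Int} (h : p.length = q.length) (z : Int) :
    inR p z ↔ inR q z := by unfold inR; rw [h]

structure InnerInv (par0 siz0 : List Int) (fir0 : PySem.Dict Int Int) (k : Int) (Q : List Int)
    (parent size : List Int) (first : PySem.Dict Int Int) (M : List Int) (R : Int) : Prop where
  lenp : parent.length = par0.length
  lens : size.length = siz0.length
  hwf : wfp parent
  mnodup : M.Nodup
  mprops : ∀ r ∈ M, isRoot par0 r ∧ inR par0 r ∧ r ≠ k ∧
    ∃ q ∈ Q, ∃ v, fir0.get? q = some v ∧ rootOf par0 v = r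
  mcover : ∀ q ∈ Q, ∀ v, fir0.get? q = some v → rootOf par0 v ∈ M
  hRor : R = k ∨ R ∈ M
  roots : ∀ z, inR par0 z → rootOf parent z =
    if (rootOf par0 z = k ∨ rootOf par0 z ∈ M) then R else rootOf par0 z
  sizeR : SizeAt size R = 1 + (M.map (SizeAt siz0)).sum
  sizeU : ∀ w, 0 ≤ w → ¬(w = k ∨ w ∈ M) → SizeAt size w = SizeAt siz0 w
  fupd : ∀ q, first.get? q = (if q ∈ Q ∧ fir0.get? q = none then some k else fir0.get? q)

lemma inner_step
    {par0 siz0 : List Int} {fir0 : PySem.Dict Int Int} {k : Int}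
    (hwf0 : wfp par0) (hlen0 : siz0.length = par0.length)
    (hk : inR par0 k) (hkroot0 : rootOf par0 k = k)
    (hkiso : ∀ y, inR par0 y → rootOf par0 y = k → y = k)
    (hfirst0 : ∀ q v, fir0.get? q = some v → 0 ≤ v ∧ v < k)
    {Q : List Int} {parent size : List Int} {first : PySem.Dict Int Int} {M : List Int} {R : Int}
    (q : Int) (hqQ : q ∉ Q)
    (inv : InnerInv par0 siz0 fir0 k Q parent size first M R) :
    ∃ parent' size' first' M' R',
      pvInnerStep k (some (parent, size, first)) q = some (parent', size', first') ∧
      InnerInv par0 siz0 fir0 k (Q ++ [q]) parent' size' first' M' R' := by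
  classical
  have hfq : first.get? q = fir0.get? q := by
    rw [inv.fupd q, if_neg]
    rintro ⟨hq, _⟩
    exact hqQ hq
  have hfupd_ext : ∀ q', (if q' ∈ Q ∧ fir0.get? q' = none then some k else fir0.get? q') =
      (if q' ∈ Q ++ [q] ∧ fir0.get? q' = none then some k else fir0.get? q') ∨ q' = q := by
    intro q'
    by_cases hq' : q' = q
    · right; exact hq'
    · left
      have : q' ∈ Q ↔ q' ∈ Q ++ [q] := by
        simp [List.mem_append, hq']
      by_cases h1 : q' ∈ Q ∧ fir0.get? q' = none
      · rw [if_pos h1, if_pos ⟨this.1 h1.1, h1.2⟩]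
      · rw [if_neg h1, if_neg (by rw [← this] at *; exact h1)]
  cases h0 : fir0.get? q with
  | none =>
    refine ⟨parent, size, first.insert q k, M, R, ?_, ?_⟩
    · simp only [pvInnerStep, hfq, h0]
    · refine ⟨inv.lenp, inv.lens, inv.hwf, inv.mnodup, ?_, ?_, inv.hRor, inv.roots,
        inv.sizeR, inv.sizeU, ?_⟩
      · intro r hr
        obtain ⟨h1, h2, h3, qq, hqq, v, hv1, hv2⟩ := inv.mprops r hr
        exact ⟨h1, h2, h3, qq, List.mem_append_left _ hqq, v, hv1, hv2⟩
      · intro q' hq' v hv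
        rcases List.mem_append.1 hq' with h | h
        · exact inv.mcover q' h v hv
        · have : q' = q := by simpa using h
          subst this
          rw [h0] at hv; cases hv
      · intro q'
        rw [PySem.Dict.get?_insert]
        by_cases hq' : q' = q
        · subst hq'
          rw [if_pos rfl, if_pos ⟨List.mem_append_right _ (by simp), h0⟩]
        · rw [if_neg hq', inv.fupd q']
          rcases hfupd_ext q' with h | h
          · exact h
          · exact absurd h hq'
  | some v =>
    obtain ⟨hv0, hvk⟩ := hfirst0 q v h0
    have hvin : inR par0 v := ⟨hv0, by have := hk.2; omega⟩
    set rv := rootOf par0 v with hrvdef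
    have hrv_root : isRoot par0 rv := rootOf_isRoot hwf0 hvin
    have hrv_in : inR par0 rv := rootOf_inR hwf0 hvin
    have hrvk : rv ≠ k := by
      intro h
      have := hkiso v hvin (hrvdef ▸ h)
      omega
    have hinrP : ∀ z, inR parent z ↔ inR par0 z := inR_iff_of_len inv.lenp
    have hkP : inR parent k := (hinrP k).2 hk
    have hvP : inR parent v := (hinrP v).2 hvin
    have hlenPS : size.length = parent.length := by rw [inv.lens, hlen0, inv.lenp]
    have hrootk : rootOf parent k = R := by
      rw [inv.roots k hk, hkroot0, if_pos (Or.inl rfl)]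
    obtain ⟨p2, size2, hun, hlen2, hlens2, hwf2, hdisj⟩ := union_spec inv.hwf hkP hvP hlenPS
    by_cases hrvM : rv ∈ M
    · have hrootv : rootOf parent v = R := by
        rw [inv.roots v hvin, if_pos (Or.inr hrvM)]
      have hre : rootOf parent k = rootOf parent v := by rw [hrootk, hrootv]
      rcases hdisj with ⟨_, hsz, hpres⟩ | ⟨hne, _⟩
      swap
      · exact absurd hre hne
      subst hsz
      refine ⟨p2, size2, first, M, R, ?_, ?_⟩
      · simp only [pvInnerStep, hfq, h0, hun]
      · refine ⟨hlen2.trans inv.lenp, inv.lens, hwf2, inv.mnodup, ?_, ?_, inv.hRor, ?_,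
          inv.sizeR, inv.sizeU, ?_⟩
        · intro r hr
          obtain ⟨h1, h2, h3, qq, hqq, vv, hv1, hv2⟩ := inv.mprops r hr
          exact ⟨h1, h2, h3, qq, List.mem_append_left _ hqq, vv, hv1, hv2⟩
        · intro q' hq' vv hv
          rcases List.mem_append.1 hq' with h | h
          · exact inv.mcover q' h vv hv
          · have : q' = q := by simpa using h
            subst this
            rw [h0] at hv
            cases hv
            exact hrvM
        · intro z hz
          rw [hpres z ((hinrP z).2 hz)]
          exact inv.roots z hz
        · intro q'
          rw [inv.fupd q']
          rcases hfupd_ext q' with h | h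
          · exact h
          · subst h
            rw [if_neg (by rintro ⟨_, hnone⟩; rw [h0] at hnone; cases hnone),
              if_neg (by rintro ⟨_, hnone⟩; rw [h0] at hnone; cases hnone)]
    · have hrootv : rootOf parent v = rv := by
        rw [inv.roots v hvin, if_neg (by tauto)]
      have hRnrv : R ≠ rv := by
        rcases inv.hRor with h | h
        · rw [h]; exact fun hh => hrvk hh.symm
        · intro hh; rw [hh] at h; exact hrvM h
      have hre : rootOf parent k ≠ rootOf parent v := by
        rw [hrootk, hrootv]; exact hRnrv
      rcases hdisj with ⟨heq, _⟩ | ⟨hne, R', hR'or, hroots2, hsizeU2, hsizeR2⟩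
      · exact absurd heq hre
      refine ⟨p2, size2, first, M ++ [rv], R', ?_, ?_⟩
      · simp only [pvInnerStep, hfq, h0, hun]
      · rw [hrootk, hrootv] at hroots2 hsizeR2 hR'or
        have hR'M : R' = k ∨ R' ∈ M ++ [rv] := by
          rcases hR'or with h | h
          · subst h
            rcases inv.hRor with h2 | h2
            · exact Or.inl h2
            · exact Or.inr (List.mem_append_left _ h2)
          · subst h; exact Or.inr (List.mem_append_right _ (by simp))
        refine ⟨hlen2.trans inv.lenp, by rw [hlens2, hlenPS.symm, inv.lens], hwf2,
          ?_, ?_, ?_, hR'M, ?_, ?_, ?_, ?_⟩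
        · have hnrv : ∀ a ∈ M, ¬ a = rv := fun a ha h => hrvM (h ▸ ha)
          simp only [List.nodup_append]
          refine ⟨inv.mnodup, by simp, ?_⟩
          intro a ha b hb
          have : b = rv := by simpa using hb
          subst this
          exact hnrv a ha
        · intro r hr
          rcases List.mem_append.1 hr with h | h
          · obtain ⟨h1, h2, h3, qq, hqq, vv, hv1, hv2⟩ := inv.mprops r h
            exact ⟨h1, h2, h3, qq, List.mem_append_left _ hqq, vv, hv1, hv2⟩
          · have : r = rv := by simpa using h
            subst this
            exact ⟨hrv_root, hrv_in, hrvk, q, List.mem_append_right _ (by simp), v, h0, rfl⟩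
        · intro q' hq' vv hv
          rcases List.mem_append.1 hq' with h | h
          · exact List.mem_append_left _ (inv.mcover q' h vv hv)
          · have : q' = q := by simpa using h
            subst this
            rw [h0] at hv
            cases hv
            exact List.mem_append_right _ (by simp [hrvdef])
        · intro z hz
          have h1 := hroots2 z ((hinrP z).2 hz)
          rw [inv.roots z hz] at h1
          by_cases hc : rootOf par0 z = k ∨ rootOf par0 z ∈ M
          · rw [if_pos hc] at h1
            rw [h1, if_pos (Or.inl rfl)]
            rw [if_pos]
            rcases hc with h | h
            · exact Or.inl h
            · exact Or.inr (List.mem_append_left _ h)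
          · rw [if_neg hc] at h1
            rw [h1]
            by_cases hc2 : rootOf par0 z = rv
            · rw [if_pos (Or.inr hc2), if_pos (Or.inr (List.mem_append_right _ (by simp [hc2])))]
            · have hcR : rootOf par0 z ≠ R := by
                intro hh
                rcases inv.hRor with h2 | h2
                · exact hc (Or.inl (hh.trans h2))
                · exact hc (Or.inr (hh ▸ h2))
              rw [if_neg (by tauto), if_neg]
              intro hcon
              rcases hcon with h | h
              · exact hc (Or.inl h)
              · rcases List.mem_append.1 h with h2 | h2
                · exact hc (Or.inr h2)
                · exact hc2 (by simpa using h2)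
        · rw [hsizeR2]
          have hrvsz : SizeAt size rv = SizeAt siz0 rv := inv.sizeU rv hrv_in.1 (by tauto)
          have h2 : ∀ w, 0 ≤ w → w ≠ R' → SizeAt size2 w = SizeAt size w := hsizeU2
          rcases hR'or with h | h
          · subst h
            rw [hrvsz, inv.sizeR]
            simp [List.sum_append]
            ring
          · subst h
            rw [hrvsz, inv.sizeR]
            simp [List.sum_append]
            ring
        · intro w hw0 hw
          have hwk : ¬(w = k ∨ w ∈ M) := by
            intro hh
            apply hw
            rcases hh with h | h
            · exact Or.inl h
            · exact Or.inr (List.mem_append_left _ h)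
          have hwrv : w ≠ rv := by
            intro hh
            exact hw (Or.inr (List.mem_append_right _ (by simp [hh])))
          have hwR' : w ≠ R' := by
            intro hh
            rcases hR'or with h | h
            · exact hwk (by rw [hh, h] at *; rcases inv.hRor with h2 | h2; exact Or.inl h2; exact Or.inr h2)
            · exact hwrv (hh.trans h)
          rw [hsizeU2 w hw0 hwR']
          exact inv.sizeU w hw0 hwk
        · intro q'
          rw [inv.fupd q']
          rcases hfupd_ext q' with h | h
          · exact h
          · subst h
            rw [if_neg (by rintro ⟨_, hnone⟩; rw [h0] at hnone; cases hnone),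
              if_neg (by rintro ⟨_, hnone⟩; rw [h0] at hnone; cases hnone)]

lemma inner_fold
    {par0 siz0 : List Int} {fir0 : PySem.Dict Int Int} {k : Int}
    (hwf0 : wfp par0) (hlen0 : siz0.length = par0.length)
    (hk : inR par0 k) (hkroot0 : rootOf par0 k = k)
    (hkiso : ∀ y, inR par0 y → rootOf par0 y = k → y = k)
    (hfirst0 : ∀ q v, fir0.get? q = some v → 0 ≤ v ∧ v < k) :
    ∀ (L Q : List Int) {parent size : List Int} {first : PySem.Dict Int Int} {M : List Int} {R : Int},
      (Q ++ L).Nodup →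
      InnerInv par0 siz0 fir0 k Q parent size first M R →
      ∃ parent' size' first' M' R',
        (L.foldl (pvInnerStep k) (some (parent, size, first))) = some (parent', size', first') ∧
        InnerInv par0 siz0 fir0 k (Q ++ L) parent' size' first' M' R' := by
  intro L
  induction L with
  | nil =>
    intro Q parent size first M R _ inv
    exact ⟨parent, size, first, M, R, rfl, by simpa using inv⟩
  | cons q L ih =>
    intro Q parent size first M R hnd inv
    have hqQ : q ∉ Q := by
      intro h
      have := List.disjoint_of_nodup_append hnd
      exact this h (by simp)
    obtain ⟨p1, s1, f1, M1, R1, hstep, inv1⟩ :=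
      inner_step hwf0 hlen0 hk hkroot0 hkiso hfirst0 q hqQ inv
    have hnd' : ((Q ++ [q]) ++ L).Nodup := by
      rwa [List.append_assoc, List.singleton_append]
    obtain ⟨p2, s2, f2, M2, R2, hfold, inv2⟩ := ih (Q ++ [q]) hnd' inv1
    refine ⟨p2, s2, f2, M2, R2, ?_, ?_⟩
    · rw [List.foldl_cons, hstep, hfold]
    · rwa [List.append_assoc, List.singleton_append] at inv2

lemma merge_fold (l : List (PySem.Set Int × Int)) :
    ∀ (s : PySem.Set Int) (t : Int),
      (l.foldl (fun (mt : PySem.Set Int × Int) c => (PySem.Set.union mt.1 c.1, mt.2 + c.2)) (s, t)).2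
        = t + (l.map (fun c => c.2)).sum ∧
      ∀ (x : Int), x ∈ (l.foldl (fun (mt : PySem.Set Int × Int) c => (PySem.Set.union mt.1 c.1, mt.2 + c.2)) (s, t)).1
        ↔ (x ∈ s ∨ ∃ c ∈ l, x ∈ c.1) := by
  induction l with
  | nil => intro s t; simp
  | cons c l ih =>
    intro s t
    rw [List.foldl_cons]
    obtain ⟨h1, h2⟩ := ih (PySem.Set.union s c.1) (t + c.2)
    constructor
    · rw [h1]; simp; ring
    · intro x
      rw [h2 x, PySem.Set.mem_union]
      constructor
      · rintro ((h | h) | ⟨d, hd, hx⟩)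
        · exact Or.inl h
        · exact Or.inr ⟨c, by simp, h⟩
        · exact Or.inr ⟨d, by simp [hd], hx⟩
      · rintro (h | ⟨d, hd, hx⟩)
        · exact Or.inl (Or.inl h)
        · rcases List.mem_cons.1 hd with rfl | hd
          · exact Or.inl (Or.inr hx)
          · exact Or.inr ⟨d, hd, hx⟩

lemma pvOddLoop_nodup (fuel : Nat) : ∀ (i n : Int) (acc : PySem.Set Int), acc.Nodup →
    ((pvOddLoop fuel i n acc).1).Nodup := by
  induction fuel with
  | zero => intro i n acc h; exact h
  | succ f ih =>
    intro i n acc h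
    rw [pvOddLoop]
    split_ifs with h1 h2
    · exact ih _ _ _ (PySem.Set.nodup_add _ _ h)
    · exact ih _ _ _ h
    · exact h

lemma pvFactors_nodup (n0 : Int) : (pvFactors n0).Nodup := by
  have hnil : (PySem.Set.empty : PySem.Set Int).Nodup := by decide
  have main : ∀ (s : PySem.Set Int) (m : Int), s.Nodup →
      (if 1 < (pvOddLoop (m.natAbs + 2) 3 m s).2 then
        PySem.Set.add (pvOddLoop (m.natAbs + 2) 3 m s).1 (pvOddLoop (m.natAbs + 2) 3 m s).2
       else (pvOddLoop (m.natAbs + 2) 3 m s).1).Nodup := by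
    intro s m hs
    split_ifs
    · exact PySem.Set.nodup_add _ _ (pvOddLoop_nodup _ _ _ _ hs)
    · exact pvOddLoop_nodup _ _ _ _ hs
  by_cases hm : PySem.Int.mod n0 2 = 0
  · unfold pvFactors
    rw [if_pos hm]
    exact main _ _ (PySem.Set.nodup_add _ _ hnil)
  · unfold pvFactors
    rw [if_neg hm]
    exact main _ _ hnil

def pvChar (first : PySem.Dict Int Int) (parent : List Int) (c : PySem.Set Int × Int) (r : Int) : Prop :=
  ∀ q : Int, q ∈ c.1 ↔ ∃ v, first.get? q = some v ∧ rootOf parent v = r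

lemma pvChar_unique {first : PySem.Dict Int Int} {parent : List Int} {c : PySem.Set Int × Int}
    {r r' : Int} (hne : c.1 ≠ []) (h1 : pvChar first parent c r) (h2 : pvChar first parent c r') :
    r = r' := by
  obtain ⟨q, hq⟩ := List.exists_mem_of_ne_nil _ hne
  obtain ⟨v, hv, hr⟩ := (h1 q).1 hq
  obtain ⟨v', hv', hr'⟩ := (h2 q).1 hq
  rw [hv] at hv'
  cases hv'
  rw [← hr, ← hr']

def Pfac (nums : List Int) (i : Nat) : PySem.Set Int := pvFactors (nums.getD i 0)

structure AInv (nums : List Int) (k : Nat) (cache : PySem.Dict Int (PySem.Set Int))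
    (parent size : List Int) (first : PySem.Dict Int Int)
    (comps : List (PySem.Set Int × Int)) (single : Bool) : Prop where
  cacheOk : ∀ v fs, cache.get? v = some fs → fs = pvFactors v
  lenp : parent.length = nums.length
  lens : size.length = nums.length
  hwf : wfp parent
  unproc : ∀ j : Nat, k ≤ j → j < nums.length → rootOf parent j = j ∧ SizeAt size j = 1 ∧
    (∀ y, inR parent y → rootOf parent y = (j : Int) → y = (j : Int))
  firstVal : ∀ q v, first.get? q = some v → ∃ i : Nat, i < k ∧ v = (i : Int) ∧ q ∈ Pfac nums i
  firstSome : ∀ (i : Nat) (q : Int), i < k → q ∈ Pfac nums i → (first.get? q).isSome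
  singleIff : single = true ↔ ∃ i : Nat, i < k ∧ Pfac nums i = []
  emptyProc : ∀ i : Nat, i < k → Pfac nums i = [] → rootOf parent i = i ∧ SizeAt size i = 1 ∧
    (∀ y, inR parent y → rootOf parent y = (i : Int) → y = (i : Int))
  disj : List.Pairwise (fun c d => ∀ q : Int, q ∈ c.1 → q ∉ d.1) comps
  good : ∀ c ∈ comps, c.1 ≠ [] ∧ 1 ≤ c.2 ∧ ∃ r, inR parent r ∧ isRoot parent r ∧
    SizeAt size r = c.2 ∧ pvChar first parent c r
  cover : ∀ i : Nat, i < k → Pfac nums i ≠ [] → ∃ c ∈ comps, ∃ r,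
    pvChar first parent c r ∧ rootOf parent (i : Int) = r

lemma outer_core {nums : List Int} {k : Nat} (hkN : k < nums.length)
    {cache : PySem.Dict Int (PySem.Set Int)} {parent size : List Int}
    {first : PySem.Dict Int Int} {comps : List (PySem.Set Int × Int)} {single : Bool}
    (inv : AInv nums k cache parent size first comps single) :
    ∃ parentF sizeF firstF,
      ((pvFactors (nums.getD k 0) : List Int).foldl (pvInnerStep (k : Int)) (some (parent, size, first)))
        = some (parentF, sizeF, firstF) ∧
      ∀ cache' : PySem.Dict Int (PySem.Set Int), (∀ v fs, cache'.get? v = some fs → fs = pvFactors v) →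
        AInv nums (k+1) cache' parentF sizeF firstF
          (pvStepB (comps, single) (nums.getD k 0)).1 (pvStepB (comps, single) (nums.getD k 0)).2 := by
  classical
  set num := nums.getD k 0 with hnum
  set pf := pvFactors num with hpf
  have hPk : Pfac nums k = pf := rfl
  have hkI : inR parent (k : Int) := ⟨by positivity, by rw [inv.lenp]; exact_mod_cast hkN⟩
  have hkun := inv.unproc k le_rfl hkN
  by_cases hpfe : pf = []
  · -- number with no prime factors
    refine ⟨parent, size, first, by rw [hpfe]; rfl, ?_⟩
    intro cache' hc'
    have hB : pvStepB (comps, single) num = (comps, true) := by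
      unfold pvStepB
      rw [if_pos (by rw [List.isEmpty_iff]; exact hpfe)]
    rw [hB]
    refine ⟨hc', inv.lenp, inv.lens, inv.hwf, ?_, ?_, ?_, ?_, ?_, inv.disj, inv.good, ?_⟩
    · intro j hj hjN; exact inv.unproc j (by omega) hjN
    · intro q v hv
      obtain ⟨i, hi, hvi, hqi⟩ := inv.firstVal q v hv
      exact ⟨i, by omega, hvi, hqi⟩
    · intro i q hi hq
      rcases Nat.lt_succ_iff_lt_or_eq.1 hi with h | rfl
      · exact inv.firstSome i q h hq
      · rw [hPk, hpfe] at hq; cases hq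
    · exact iff_of_true rfl ⟨k, by omega, by rw [hPk]; exact hpfe⟩
    · intro i hi he
      rcases Nat.lt_succ_iff_lt_or_eq.1 hi with h | rfl
      · exact inv.emptyProc i h he
      · exact hkun
    · intro i hi he
      rcases Nat.lt_succ_iff_lt_or_eq.1 hi with h | rfl
      · exact inv.cover i h he
      · rw [hPk, hpfe] at he; exact absurd rfl he
  · -- number with at least one prime factor
    have hlen0 : size.length = parent.length := by rw [inv.lens, inv.lenp]
    have hfirst0 : ∀ q v, first.get? q = some v → 0 ≤ v ∧ v < (k : Int) := by
      intro q v hv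
      obtain ⟨i, hi, rfl, _⟩ := inv.firstVal q v hv
      constructor <;> [positivity; exact_mod_cast hi]
    have hinit : InnerInv parent size first (k : Int) [] parent size first [] (k : Int) := by
      refine ⟨rfl, rfl, inv.hwf, List.nodup_nil, by simp, by simp, Or.inl rfl, ?_, ?_, ?_, ?_⟩
      · intro z hz
        by_cases hc : rootOf parent z = (k : Int) ∨ rootOf parent z ∈ ([] : List Int)
        · rcases hc with h | h
          · rw [if_pos (Or.inl h), h]
          · cases h
        · rw [if_neg hc]
      · simpa using hkun.2.1
      · intro w _ _; rfl
      · intro q; simp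
    obtain ⟨parentF, sizeF, firstF, M, R, hfold, innerinv⟩ :=
      inner_fold inv.hwf hlen0 hkI hkun.1 hkun.2.2 hfirst0 (pf : List Int) []
        (by simpa using pvFactors_nodup num) hinit
    rw [List.nil_append] at innerinv
    refine ⟨parentF, sizeF, firstF, hfold, ?_⟩
    intro cache' hc'
    -- abbreviations
    have hinrF : ∀ z, inR parentF z ↔ inR parent z := inR_iff_of_len innerinv.lenp
    have hrootFk : rootOf parentF (k : Int) = R := by
      rw [innerinv.roots (k : Int) hkI, hkun.1, if_pos (Or.inl rfl)]
    have hMne_k : ∀ r ∈ M, r ≠ (k : Int) := fun r hr => (innerinv.mprops r hr).2.2.1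
    have hMroot : ∀ r ∈ M, rootOf parent r = r := fun r hr =>
      rootOf_eq_of_isRoot (innerinv.mprops r hr).1
    have hMinR : ∀ r ∈ M, inR parent r := fun r hr => (innerinv.mprops r hr).2.1
    have hRroot0 : rootOf parent R = R := by
      rcases innerinv.hRor with h | h
      · rw [h]; exact hkun.1
      · exact hMroot R h
    have hRinR : inR parent R := by
      rcases innerinv.hRor with h | h
      · rw [h]; exact hkI
      · exact hMinR R h
    have hrootF : ∀ z, inR parent z → rootOf parentF z =
        if (rootOf parent z = (k : Int) ∨ rootOf parent z ∈ M) then R else rootOf parent z :=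
      innerinv.roots
    -- indices below k are in range
    have hltk_inR : ∀ v : Int, 0 ≤ v → v < (k : Int) → inR parent v := by
      intro v h0 h1
      have hkk : (k : Int) < (nums.length : Int) := by exact_mod_cast hkN
      exact ⟨h0, by rw [inv.lenp]; omega⟩
    -- M elements are roots of processed indices
    have hMproc : ∀ r ∈ M, ∃ i : Nat, i < k ∧ rootOf parent (i : Int) = r ∧ Pfac nums i ≠ [] := by
      intro r hr
      obtain ⟨_, _, _, q, hqpf, v, hv, hvr⟩ := innerinv.mprops r hr
      obtain ⟨i, hi, rfl, hqi⟩ := inv.firstVal q v hv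
      exact ⟨i, hi, hvr, fun he => by rw [he] at hqi; cases hqi⟩
    -- processed empty indices and unprocessed indices are not in M and not k
    have hjnotM : ∀ j : Nat, k ≤ j → j < nums.length → (j : Int) ∉ M := by
      intro j hj hjN hmem
      obtain ⟨i, hik, hir, _⟩ := hMproc _ hmem
      have := (inv.unproc j hj hjN).2.2 (i : Int)
        (hltk_inR _ (by positivity) (by exact_mod_cast hik)) hir
      have : i = j := by exact_mod_cast this
      omega
    have hjnotM' : ∀ i : Nat, i < k → Pfac nums i = [] → (i : Int) ∉ M ∧ (i : Int) ≠ (k : Int) := by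
      intro i hik hie
      constructor
      · intro hmem
        obtain ⟨i', hik', hir', _⟩ := hMproc _ hmem
        have := (inv.emptyProc i hik hie).2.2 (i' : Int)
          (hltk_inR _ (by positivity) (by exact_mod_cast hik')) hir'
        have hii : i' = i := by exact_mod_cast this
        subst hii
        obtain ⟨_, _, _, q, hqpf, v, hv, hvr⟩ := innerinv.mprops _ hmem
        obtain ⟨i2, hi2, hv2, hqi2⟩ := inv.firstVal q v hv
        have : i2 = i' := by
          have := (inv.emptyProc i' hik hie).2.2 v
            (hltk_inR _ (by rw [hv2]; positivity) (by rw [hv2]; exact_mod_cast hi2)) hvr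
          rw [hv2] at this; exact_mod_cast this
        subst this
        rw [hie] at hqi2; cases hqi2
      · intro h
        have : i = k := by exact_mod_cast h
        omega
    -- touching characterization
    have htouch_iff : ∀ c ∈ comps, ∀ rc, pvChar first parent c rc →
        ((pf.any (fun p => PySem.Set.contains c.1 p) = true) ↔ rc ∈ M) := by
      intro c hc rc hchar
      constructor
      · intro h
        obtain ⟨p, hppf, hpc⟩ := List.any_eq_true.1 h
        have hpc' : p ∈ c.1 := by simpa using hpc
        obtain ⟨v, hv, hvr⟩ := (hchar p).1 hpc'
        have := innerinv.mcover p hppf v hv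
        rwa [hvr] at this
      · intro h
        obtain ⟨_, _, _, q, hqpf, v, hv, hvr⟩ := innerinv.mprops rc h
        have hqc : q ∈ c.1 := (hchar q).2 ⟨v, hv, hvr⟩
        exact List.any_eq_true.2 ⟨q, hqpf, by simpa using hqc⟩
    -- the rep of a comp is not k
    have hrc_ne_k : ∀ c ∈ comps, ∀ rc, pvChar first parent c rc → rc ≠ (k : Int) := by
      intro c hc rc hchar hk'
      obtain ⟨hne, _, _⟩ := inv.good c hc
      obtain ⟨q, hq⟩ := List.exists_mem_of_ne_nil _ hne
      obtain ⟨v, hv, hvr⟩ := (hchar q).1 hq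
      obtain ⟨i, hi, rfl, _⟩ := inv.firstVal q v hv
      have := hkun.2.2 (i : Int) (hltk_inR _ (by positivity) (by exact_mod_cast hi)) (by rw [hvr, hk'])
      have : i = k := by exact_mod_cast this
      omega
    -- char transfer for untouched comps
    have hchar_rest : ∀ c ∈ comps, ∀ rc, pvChar first parent c rc → rc ∉ M →
        pvChar firstF parentF c rc := by
      intro c hc rc hchar hrcM q
      have hrck := hrc_ne_k c hc rc hchar
      have hRnrc : R ≠ rc := by
        rcases innerinv.hRor with h | h
        · rw [h]; exact fun hh => hrck hh.symm
        · intro hh; rw [hh] at h; exact hrcM h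
      constructor
      · intro hq
        obtain ⟨v, hv, hvr⟩ := (hchar q).1 hq
        obtain ⟨i, hi, hvi, _⟩ := inv.firstVal q v hv
        have hvin : inR parent v := hltk_inR v (by rw [hvi]; positivity) (by rw [hvi]; exact_mod_cast hi)
        refine ⟨v, ?_, ?_⟩
        · rw [innerinv.fupd q, if_neg]
          · exact hv
          · rintro ⟨_, hnone⟩; rw [hv] at hnone; cases hnone
        · rw [hrootF v hvin, hvr, if_neg (by tauto)]
      · rintro ⟨v, hv, hvr⟩
        rw [innerinv.fupd q] at hv
        by_cases hcnd : q ∈ (pf : List Int) ∧ first.get? q = none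
        · rw [if_pos hcnd] at hv
          cases hv
          rw [hrootFk] at hvr
          exact absurd hvr hRnrc
        · rw [if_neg hcnd] at hv
          obtain ⟨i, hi, hvi, _⟩ := inv.firstVal q v hv
          have hvin : inR parent v := hltk_inR v (by rw [hvi]; positivity) (by rw [hvi]; exact_mod_cast hi)
          rw [hrootF v hvin] at hvr
          by_cases hcnd2 : rootOf parent v = (k : Int) ∨ rootOf parent v ∈ M
          · rw [if_pos hcnd2] at hvr
            exact absurd hvr hRnrc
          · rw [if_neg hcnd2] at hvr
            exact (hchar q).2 ⟨v, hv, hvr⟩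
    -- ===== B-side reduction =====
    have hB : pvStepB (comps, single) num =
        (comps.filter (fun c => !((pf : List Int).any (fun p => PySem.Set.contains c.1 p))) ++
          [(comps.filter (fun c => (pf : List Int).any (fun p => PySem.Set.contains c.1 p))).foldl
            (fun (mt : PySem.Set Int × Int) c => (PySem.Set.union mt.1 c.1, mt.2 + c.2)) (pf, 1)],
         single) := by
      unfold pvStepB
      rw [← hpf, if_neg (by simp [List.isEmpty_iff, hpfe])]
    rw [hB]
    set touching := comps.filter (fun c => (pf : List Int).any (fun p => PySem.Set.contains c.1 p)) with htouching
    set rest := comps.filter (fun c => !((pf : List Int).any (fun p => PySem.Set.contains c.1 p))) with hrest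
    set mtv := touching.foldl (fun (mt : PySem.Set Int × Int) c => (PySem.Set.union mt.1 c.1, mt.2 + c.2)) (pf, 1) with hmtv
    obtain ⟨hmt2, hmt1⟩ := merge_fold touching pf 1
    rw [← hmtv] at hmt2 hmt1
    have hgoodT : ∀ c ∈ touching, c ∈ comps ∧ (pf : List Int).any (fun p => PySem.Set.contains c.1 p) = true := by
      intro c hc
      obtain ⟨h1, h2⟩ := List.mem_filter.1 hc
      exact ⟨h1, h2⟩
    have hgoodRest : ∀ c ∈ rest, c ∈ comps ∧ (pf : List Int).any (fun p => PySem.Set.contains c.1 p) = false := by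
      intro c hc
      obtain ⟨h1, h2⟩ := List.mem_filter.1 hc
      exact ⟨h1, by simpa using h2⟩
    have hchar_of : ∀ c ∈ comps, ∃ rc, pvChar first parent c rc ∧ SizeAt size rc = c.2 ∧
        c.1 ≠ [] ∧ 1 ≤ c.2 ∧ inR parent rc ∧ isRoot parent rc := by
      intro c hc
      obtain ⟨hne, hpos, r, hrin, hroot, hsz, hchar⟩ := inv.good c hc
      exact ⟨r, hchar, hsz, hne, hpos, hrin, hroot⟩
    set g : (PySem.Set Int × Int) → Int := fun c => rootOf parent ((first.get? c.1.headI).getD 0) with hgdef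
    have hgc : ∀ c ∈ comps, ∀ rc, pvChar first parent c rc → c.1 ≠ [] → g c = rc := by
      intro c hc rc hchar hne
      obtain ⟨a, t, hct⟩ := List.exists_cons_of_ne_nil hne
      have hmem : a ∈ c.1 := by rw [hct]; simp
      obtain ⟨v, hv, hvr⟩ := (hchar a).1 hmem
      show rootOf parent ((first.get? c.1.headI).getD 0) = rc
      rw [hct]
      show rootOf parent ((first.get? a).getD 0) = rc
      rw [hv]
      simpa using hvr
    have hgT : ∀ c ∈ touching, g c ∈ M ∧ SizeAt size (g c) = c.2 := by
      intro c hc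
      obtain ⟨hcm, htc⟩ := hgoodT c hc
      obtain ⟨rc, hchar, hsz, hne, _, _, _⟩ := hchar_of c hcm
      have hgc' := hgc c hcm rc hchar hne
      rw [hgc']
      exact ⟨(htouch_iff c hcm rc hchar).1 htc, hsz⟩
    have hTpair : touching.Pairwise (fun c d => ∀ q : Int, q ∈ c.1 → q ∉ d.1) :=
      inv.disj.filter _
    have hTnodup : (touching.map g).Nodup := by
      have h1 : touching.Pairwise (fun c d => g c ≠ g d) := by
        refine List.Pairwise.imp_of_mem ?_ hTpair
        intro c d hcT hdT hdisj heq
        obtain ⟨hcm, _⟩ := hgoodT c hcT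
        obtain ⟨hdm, _⟩ := hgoodT d hdT
        obtain ⟨rc, hcharc, _, hnec, _, _, _⟩ := hchar_of c hcm
        obtain ⟨rd, hchard, _, hned, _, _, _⟩ := hchar_of d hdm
        rw [hgc c hcm rc hcharc hnec, hgc d hdm rd hchard hned] at heq
        obtain ⟨q, hq⟩ := List.exists_mem_of_ne_nil _ hnec
        obtain ⟨v, hv, hvr⟩ := (hcharc q).1 hq
        have hqd : q ∈ d.1 := (hchard q).2 ⟨v, hv, by rw [hvr, heq]⟩
        exact hdisj q hq hqd
      exact List.pairwise_map.2 h1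
    have hmemTg : ∀ r : Int, r ∈ touching.map g ↔ r ∈ M := by
      intro r
      constructor
      · intro hr
        obtain ⟨c, hc, rfl⟩ := List.mem_map.1 hr
        exact (hgT c hc).1
      · intro hr
        obtain ⟨_, _, _, q, hqpf, v, hv, hvr⟩ := innerinv.mprops r hr
        obtain ⟨i, hi, hvi, hqi⟩ := inv.firstVal q v hv
        have hPine : Pfac nums i ≠ [] := by
          intro he; rw [he] at hqi; simp at hqi
        obtain ⟨c, hcm, rc', hchar', hroot'⟩ := inv.cover i hi hPine
        have hvi' : rootOf parent v = rc' := by rw [hvi]; exact hroot'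
        have hrr : rc' = r := by rw [← hvi', hvr]
        have hqc : q ∈ c.1 := (hchar' q).2 ⟨v, hv, hvi'⟩
        have hne : c.1 ≠ [] := List.ne_nil_of_mem hqc
        have htc : (pf : List Int).any (fun p => PySem.Set.contains c.1 p) = true :=
          List.any_eq_true.2 ⟨q, hqpf, by simpa using hqc⟩
        exact List.mem_map.2 ⟨c, List.mem_filter.2 ⟨hcm, htc⟩, by rw [hgc c hcm rc' hchar' hne, hrr]⟩
    have hperm : (touching.map g).Perm M :=
      (List.perm_ext_iff_of_nodup hTnodup innerinv.mnodup).2 hmemTg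
    have hsum : (touching.map (fun c => c.2)).sum = (M.map (SizeAt size)).sum := by
      have h1 : touching.map (fun c => c.2) = touching.map (fun c => SizeAt size (g c)) :=
        List.map_congr_left (fun c hc => ((hgT c hc).2).symm)
      have h2 : touching.map (fun c => SizeAt size (g c)) = (touching.map g).map (SizeAt size) := by
        rw [List.map_map]; rfl
      rw [h1, h2]
      exact (hperm.map (SizeAt size)).sum_eq
    have hRF_root : rootOf parentF R = R := by
      rw [hrootF R hRinR, hRroot0, if_pos innerinv.hRor]
    have hRF_isroot : isRoot parentF R := by
      have h := rootOf_isRoot innerinv.hwf ((hinrF R).2 hRinR)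
      rwa [hRF_root] at h
    have hmtsz : SizeAt sizeF R = mtv.2 := by
      rw [innerinv.sizeR, hmt2, hsum]
    -- char for the merged component
    have hcharmt : pvChar firstF parentF mtv R := by
      intro q
      rw [hmt1 q]
      constructor
      · rintro (hq | ⟨c, hcT, hqc⟩)
        · cases hfq0 : first.get? q with
          | none => exact ⟨(k : Int), by rw [innerinv.fupd q, if_pos ⟨hq, hfq0⟩], hrootFk⟩
          | some v =>
            have hvM := innerinv.mcover q hq v hfq0
            obtain ⟨i, hi, hvi, _⟩ := inv.firstVal q v hfq0
            have hvin : inR parent v :=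
              hltk_inR v (by rw [hvi]; positivity) (by rw [hvi]; exact_mod_cast hi)
            refine ⟨v, ?_, ?_⟩
            · rw [innerinv.fupd q, if_neg (by rintro ⟨_, h⟩; rw [hfq0] at h; cases h)]
              exact hfq0
            · rw [hrootF v hvin, if_pos (Or.inr hvM)]
        · obtain ⟨hcm, htc⟩ := hgoodT c hcT
          obtain ⟨rc, hchar, _, hne, _, _, _⟩ := hchar_of c hcm
          have hrcM : rc ∈ M := (htouch_iff c hcm rc hchar).1 htc
          obtain ⟨v, hv, hvr⟩ := (hchar q).1 hqc
          obtain ⟨i, hi, hvi, _⟩ := inv.firstVal q v hv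
          have hvin : inR parent v :=
            hltk_inR v (by rw [hvi]; positivity) (by rw [hvi]; exact_mod_cast hi)
          refine ⟨v, ?_, ?_⟩
          · rw [innerinv.fupd q, if_neg (by rintro ⟨_, h⟩; rw [hv] at h; cases h)]
            exact hv
          · rw [hrootF v hvin, hvr, if_pos (Or.inr hrcM)]
      · rintro ⟨v, hv, hvr⟩
        rw [innerinv.fupd q] at hv
        by_cases hcnd : q ∈ (pf : List Int) ∧ first.get? q = none
        · exact Or.inl hcnd.1
        · rw [if_neg hcnd] at hv
          obtain ⟨i, hi, hvi, hqi⟩ := inv.firstVal q v hv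
          have hvin : inR parent v :=
            hltk_inR v (by rw [hvi]; positivity) (by rw [hvi]; exact_mod_cast hi)
          rw [hrootF v hvin] at hvr
          by_cases hcnd2 : rootOf parent v = (k : Int) ∨ rootOf parent v ∈ M
          · rcases hcnd2 with h | h
            · exfalso
              have h2 := hkun.2.2 v hvin h
              rw [hvi] at h2
              have : i = k := by exact_mod_cast h2
              omega
            · right
              obtain ⟨_, _, _, q2, hq2pf, v2, hv2, hv2r⟩ := innerinv.mprops (rootOf parent v) h
              have hPine : Pfac nums i ≠ [] := by
                intro he; rw [he] at hqi; simp at hqi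
              obtain ⟨c, hcm, rc', hchar', hroot'⟩ := inv.cover i hi hPine
              have hvi' : rootOf parent v = rc' := by rw [hvi]; exact hroot'
              have hqc : q ∈ c.1 := (hchar' q).2 ⟨v, hv, hvi'⟩
              have hq2c : q2 ∈ c.1 := (hchar' q2).2 ⟨v2, hv2, by rw [hv2r, hvi']⟩
              have htc : (pf : List Int).any (fun p => PySem.Set.contains c.1 p) = true :=
                List.any_eq_true.2 ⟨q2, hq2pf, by simpa using hq2c⟩
              exact ⟨c, List.mem_filter.2 ⟨hcm, htc⟩, hqc⟩
          · rw [if_neg hcnd2] at hvr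
            exfalso
            rcases innerinv.hRor with hR | hR
            · exact hcnd2 (Or.inl (by rw [hvr, hR]))
            · exact hcnd2 (Or.inr (by rw [hvr]; exact hR))
    -- facts about untouched comps
    have hrest_facts : ∀ c ∈ rest, ∃ rc, pvChar first parent c rc ∧ rc ∉ M ∧ rc ≠ (k : Int) ∧
        SizeAt size rc = c.2 ∧ c.1 ≠ [] ∧ 1 ≤ c.2 ∧ inR parent rc ∧ isRoot parent rc := by
      intro c hc
      obtain ⟨hcm, htc⟩ := hgoodRest c hc
      obtain ⟨rc, hchar, hsz, hne, hpos, hrin, hroot⟩ := hchar_of c hcm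
      have hrcM : rc ∉ M := by
        intro hM
        have h1 := (htouch_iff c hcm rc hchar).2 hM
        rw [h1] at htc
        cases htc
      exact ⟨rc, hchar, hrcM, hrc_ne_k c hcm rc hchar, hsz, hne, hpos, hrin, hroot⟩
    -- assemble the new invariant
    refine ⟨hc', innerinv.lenp.trans inv.lenp, innerinv.lens.trans inv.lens, innerinv.hwf,
      ?_, ?_, ?_, ?_, ?_, ?_, ?_, ?_⟩
    · -- unproc
      intro j hj hjN
      have hjk : (j : Int) ≠ (k : Int) := by
        intro h
        have : j = k := by exact_mod_cast h
        omega
      have hjM : (j : Int) ∉ M := hjnotM j (by omega) hjN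
      obtain ⟨hjr, hjs, hjiso⟩ := inv.unproc j (by omega) hjN
      have hjin : inR parent (j : Int) := ⟨by positivity, by rw [inv.lenp]; exact_mod_cast hjN⟩
      refine ⟨?_, ?_, ?_⟩
      · rw [hrootF _ hjin, hjr, if_neg (by rintro (h | h); exacts [hjk h, hjM h])]
      · rw [innerinv.sizeU _ (by positivity) (by rintro (h | h); exacts [hjk h, hjM h])]
        exact hjs
      · intro y hy hyr
        have hy' : inR parent y := (hinrF y).1 hy
        rw [hrootF y hy'] at hyr
        by_cases hc : rootOf parent y = (k : Int) ∨ rootOf parent y ∈ M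
        · rw [if_pos hc] at hyr
          exfalso
          rcases innerinv.hRor with hR | hR
          · rw [hR] at hyr; exact hjk hyr.symm
          · rw [hyr] at hR; exact hjM hR
        · rw [if_neg hc] at hyr
          exact hjiso y hy' hyr
    · -- firstVal
      intro q v hv
      rw [innerinv.fupd q] at hv
      by_cases hcnd : q ∈ (pf : List Int) ∧ first.get? q = none
      · rw [if_pos hcnd] at hv
        cases hv
        exact ⟨k, by omega, rfl, hcnd.1⟩
      · rw [if_neg hcnd] at hv
        obtain ⟨i, hi, hvi, hqi⟩ := inv.firstVal q v hv
        exact ⟨i, by omega, hvi, hqi⟩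
    · -- firstSome
      intro i q hi hq
      rw [innerinv.fupd q]
      rcases Nat.lt_succ_iff_lt_or_eq.1 hi with h | rfl
      · have h1 := inv.firstSome i q h hq
        by_cases hcnd : q ∈ (pf : List Int) ∧ first.get? q = none
        · rw [if_pos hcnd]; rfl
        · rw [if_neg hcnd]; exact h1
      · by_cases hcnd : q ∈ (pf : List Int) ∧ first.get? q = none
        · rw [if_pos hcnd]; rfl
        · rw [if_neg hcnd]
          cases hfq0 : first.get? q with
          | some v => rfl
          | none => exact absurd ⟨hq, hfq0⟩ hcnd
    · -- singleIff
      rw [inv.singleIff]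
      constructor
      · rintro ⟨i, hi, he⟩
        exact ⟨i, by omega, he⟩
      · rintro ⟨i, hi, he⟩
        rcases Nat.lt_succ_iff_lt_or_eq.1 hi with h | rfl
        · exact ⟨i, h, he⟩
        · rw [hPk] at he; exact absurd he hpfe
    · -- emptyProc
      intro i hi he
      rcases Nat.lt_succ_iff_lt_or_eq.1 hi with h | rfl
      swap
      · rw [hPk] at he; exact absurd he hpfe
      obtain ⟨hiM, hik⟩ := hjnotM' i h he
      obtain ⟨hir, his, hiiso⟩ := inv.emptyProc i h he
      have hiin : inR parent (i : Int) :=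
        hltk_inR _ (by positivity) (by exact_mod_cast h)
      refine ⟨?_, ?_, ?_⟩
      · rw [hrootF _ hiin, hir, if_neg (by rintro (h2 | h2); exacts [hik h2, hiM h2])]
      · rw [innerinv.sizeU _ (by positivity) (by rintro (h2 | h2); exacts [hik h2, hiM h2])]
        exact his
      · intro y hy hyr
        have hy' : inR parent y := (hinrF y).1 hy
        rw [hrootF y hy'] at hyr
        by_cases hc : rootOf parent y = (k : Int) ∨ rootOf parent y ∈ M
        · rw [if_pos hc] at hyr
          exfalso
          rcases innerinv.hRor with hR | hR
          · rw [hR] at hyr; exact hik hyr.symm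
          · rw [hyr] at hR; exact hiM hR
        · rw [if_neg hc] at hyr
          exact hiiso y hy' hyr
    · -- disj
      rw [List.pairwise_append]
      refine ⟨inv.disj.filter _, List.pairwise_singleton _ _, ?_⟩
      intro c hc d hd q hqc hqmt
      have hd' : d = mtv := by simpa using hd
      subst hd'
      obtain ⟨rc, hchar, hrcM, hrck, _, hne, _, _, _⟩ := hrest_facts c hc
      obtain ⟨hcm, htc⟩ := hgoodRest c hc
      rcases (hmt1 q).1 hqmt with hq | ⟨d, hdT, hqd⟩
      · have h1 : (pf : List Int).any (fun p => PySem.Set.contains c.1 p) = true :=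
          List.any_eq_true.2 ⟨q, hq, by simpa using hqc⟩
        rw [h1] at htc; cases htc
      · obtain ⟨hdm, htd⟩ := hgoodT d hdT
        obtain ⟨rd, hchard, _, hned, _, _, _⟩ := hchar_of d hdm
        have hrdM : rd ∈ M := (htouch_iff d hdm rd hchard).1 htd
        obtain ⟨v, hv, hvr⟩ := (hchar q).1 hqc
        obtain ⟨v2, hv2, hvr2⟩ := (hchard q).1 hqd
        rw [hv] at hv2
        cases hv2
        rw [hvr] at hvr2
        exact hrcM (hvr2 ▸ hrdM)
    · -- good
      intro c hc
      rcases List.mem_append.1 hc with hcr | hcmt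
      · obtain ⟨rc, hchar, hrcM, hrck, hsz, hne, hpos, hrin, hroot⟩ := hrest_facts c hcr
        have hrcroot0 : rootOf parent rc = rc := rootOf_eq_of_isRoot hroot
        have hrF : rootOf parentF rc = rc := by
          rw [hrootF rc hrin, hrcroot0, if_neg (by rintro (h | h); exacts [hrck h, hrcM h])]
        refine ⟨hne, hpos, rc, (hinrF rc).2 hrin, ?_, ?_, hchar_rest c (hgoodRest c hcr).1 rc hchar hrcM⟩
        · have h := rootOf_isRoot innerinv.hwf ((hinrF rc).2 hrin)
          rwa [hrF] at h
        · rw [innerinv.sizeU rc hrin.1 (by rintro (h | h); exacts [hrck h, hrcM h])]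
          exact hsz
      · have hcmt' : c = mtv := by simpa using hcmt
        subst hcmt'
        obtain ⟨q0, hq0⟩ := List.exists_mem_of_ne_nil _ hpfe
        refine ⟨List.ne_nil_of_mem ((hmt1 q0).2 (Or.inl hq0)), ?_,
          R, (hinrF R).2 hRinR, hRF_isroot, hmtsz, hcharmt⟩
        rw [hmt2]
        have hnn : 0 ≤ (touching.map (fun c => c.2)).sum := by
          apply List.sum_nonneg
          intro x hx
          obtain ⟨c, hcT, rfl⟩ := List.mem_map.1 hx
          have := (hchar_of c (hgoodT c hcT).1)
          obtain ⟨_, _, _, _, hpos, _⟩ := this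
          omega
        omega
    · -- cover
      intro i hi hine
      rcases Nat.lt_succ_iff_lt_or_eq.1 hi with h | rfl
      swap
      · exact ⟨mtv, by simp, R, hcharmt, hrootFk⟩
      obtain ⟨c, hcm, rc', hchar', hroot'⟩ := inv.cover i h hine
      obtain ⟨hne, _, rg, _, _, _, hcharg⟩ := inv.good c hcm
      have hiin : inR parent (i : Int) :=
        hltk_inR _ (by positivity) (by exact_mod_cast h)
      by_cases htc : (pf : List Int).any (fun p => PySem.Set.contains c.1 p) = true
      · have hrcM : rc' ∈ M := (htouch_iff c hcm rc' hchar').1 htc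
        refine ⟨mtv, by simp, R, hcharmt, ?_⟩
        rw [hrootF _ hiin, hroot', if_pos (Or.inr hrcM)]
      · have hrcM : rc' ∉ M := by
          intro hM
          exact htc ((htouch_iff c hcm rc' hchar').2 hM)
        have hrck := hrc_ne_k c hcm rc' hchar'
        refine ⟨c, List.mem_append_left _ (List.mem_filter.2 ⟨hcm, by
            simp only [Bool.not_eq_eq_eq_not, Bool.not_true, List.any_eq_false]
            intro x hx hxc
            exact htc (List.any_eq_true.2 ⟨x, hx, by simpa using hxc⟩)⟩), rc',
          hchar_rest c hcm rc' hchar' hrcM, ?_⟩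
        rw [hrootF _ hiin, hroot', if_neg (by rintro (h2 | h2); exacts [hrck h2, hrcM h2])]

lemma AInv_init (nums : List Int) :
    AInv nums 0 PySem.Dict.empty (PySem.List.pyRange 0 (nums.length : Int) 1)
      (PySem.List.pyRepeat [(1 : Int)] (nums.length : Int)) PySem.Dict.empty [] false := by
  have hlenp : (PySem.List.pyRange 0 (nums.length : Int) 1).length = nums.length := by
    rw [PySem.List.length_pyRange_one]; simp
  have hlens : (PySem.List.pyRepeat [(1 : Int)] (nums.length : Int)).length = nums.length := by
    rw [PySem.List.pyRepeat_singleton, List.length_replicate]; simp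
  have hstep : ∀ x, inR (PySem.List.pyRange 0 (nums.length : Int) 1) x →
      pstep (PySem.List.pyRange 0 (nums.length : Int) 1) x = x := by
    intro x hx
    rw [pstep_eq_getElem hx]
    rw [PySem.List.getElem_pyRange_one]
    have := hx.1
    omega
  have hwf0 : wfp (PySem.List.pyRange 0 (nums.length : Int) 1) :=
    ⟨fun x hx => by rw [hstep x hx]; exact hx, fun x hx => ⟨0, hstep x hx⟩⟩
  have hroot0 : ∀ x, inR (PySem.List.pyRange 0 (nums.length : Int) 1) x →
      rootOf (PySem.List.pyRange 0 (nums.length : Int) 1) x = x :=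
    fun x hx => rootOf_eq_of_isRoot (hstep x hx)
  have hsz : ∀ j : Int, 0 ≤ j → j < (nums.length : Int) →
      SizeAt (PySem.List.pyRepeat [(1 : Int)] (nums.length : Int)) j = 1 := by
    intro j h0 h1
    unfold SizeAt
    rw [PySem.List.pyRepeat_singleton,
      PySem.List.pyGetD_eq_getElem _ 0 h0 (by rw [List.length_replicate]; simp; omega)]
    simp
  refine ⟨?_, hlenp, hlens, hwf0, ?_, ?_, ?_, ?_, ?_, List.Pairwise.nil, ?_, ?_⟩
  · intro v fs h
    rw [PySem.Dict.get?_empty] at h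
    cases h
  · intro j _ hj
    have hjin : inR (PySem.List.pyRange 0 (nums.length : Int) 1) (j : Int) :=
      ⟨by positivity, by rw [hlenp]; exact_mod_cast hj⟩
    exact ⟨hroot0 _ hjin, hsz _ (by positivity) (by exact_mod_cast hj),
      fun y hy hyr => by rw [← hroot0 y hy]; exact hyr⟩
  · intro q v h
    rw [PySem.Dict.get?_empty] at h
    cases h
  · intro i q hi _
    omega
  · simp
  · intro i hi _
    omega
  · intro c hc
    cases hc
  · intro i hi _
    omega

lemma main_inv (nums : List Int) : ∀ k : Nat, k ≤ nums.length →
    ∃ cache parent size first,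
      (PySem.List.enumerate (nums.take k) 0).foldl pvStepA
        (some (PySem.Dict.empty, PySem.List.pyRange 0 (nums.length : Int) 1,
          PySem.List.pyRepeat [(1 : Int)] (nums.length : Int), PySem.Dict.empty))
        = some (cache, parent, size, first) ∧
      AInv nums k cache parent size first
        ((nums.take k).foldl pvStepB ([], false)).1 ((nums.take k).foldl pvStepB ([], false)).2 := by
  intro k
  induction k with
  | zero =>
    intro _
    exact ⟨_, _, _, _, by rw [List.take_zero, PySem.List.enumerate_nil]; rfl, AInv_init nums⟩
  | succ k ih =>
    intro hk1
    have hkN : k < nums.length := by omega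
    obtain ⟨cache, parent, size, first, hfoldA, inv⟩ := ih (by omega)
    obtain ⟨parentF, sizeF, firstF, hfold, hconc⟩ := outer_core hkN inv
    have htake : nums.take (k+1) = nums.take k ++ [nums.getD k 0] := by
      rw [List.take_succ]
      congr 1
      rw [List.getElem?_eq_getElem hkN]
      simp [List.getD_eq_getElem?_getD, List.getElem?_eq_getElem hkN]
    have hlen_take : (nums.take k).length = k := by rw [List.length_take]; omega
    have henum : PySem.List.enumerate (nums.take (k+1)) 0 =
        PySem.List.enumerate (nums.take k) 0 ++ [((k : Int), nums.getD k 0)] := by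
      rw [htake, PySem.List.enumerate_append, hlen_take]
      norm_num [PySem.List.enumerate_cons, PySem.List.enumerate_nil]
    have hstep : ∃ cache', pvStepA (some (cache, parent, size, first)) ((k : Int), nums.getD k 0)
        = ((pvFactors (nums.getD k 0) : List Int).foldl (pvInnerStep (k : Int))
            (some (parent, size, first))).map (fun t => (cache', t)) ∧
        (∀ v fs, cache'.get? v = some fs → fs = pvFactors v) := by
      cases hcget : cache.get? (nums.getD k 0) with
      | some fs =>
        refine ⟨cache, ?_, inv.cacheOk⟩
        have hfs : fs = pvFactors (nums.getD k 0) := inv.cacheOk _ _ hcget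
        simp only [pvStepA, hcget]
        rw [hfs]
      | none =>
        refine ⟨cache.insert (nums.getD k 0) (pvFactors (nums.getD k 0)), ?_, ?_⟩
        · simp only [pvStepA, hcget]
        · intro v fs h
          rw [PySem.Dict.get?_insert] at h
          by_cases hv : v = nums.getD k 0
          · rw [if_pos hv] at h
            cases h
            rw [hv]
          · rw [if_neg hv] at h
            exact inv.cacheOk v fs h
    obtain ⟨cache', hstepA, hcache'⟩ := hstep
    have hBfold : (nums.take (k+1)).foldl pvStepB ([], false) =
        pvStepB ((nums.take k).foldl pvStepB ([], false)) (nums.getD k 0) := by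
      rw [htake, List.foldl_append, List.foldl_cons, List.foldl_nil]
    refine ⟨cache', parentF, sizeF, firstF, ?_, ?_⟩
    · rw [henum, List.foldl_append, hfoldA, List.foldl_cons, List.foldl_nil, hstepA, hfold]
      rfl
    · rw [hBfold]
      exact hconc cache' hcache'

def pvOMax (a : Option Int) (v : Int) : Option Int :=
  match a with
  | none => some v
  | some b => some (max b v)

lemma omax_some (f : Int → Int) : ∀ (l : List Int) (a : Int),
    l.foldl (fun acc i => pvOMax acc (f i)) (some a) = some (l.foldl (fun b i => max b (f i)) a) := by
  intro l
  induction l with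
  | nil => intro a; rfl
  | cons i l ih => intro a; rw [List.foldl_cons, List.foldl_cons]; exact ih (max a (f i))

lemma max_fold {sizeF base : List Int} (hlen : sizeF.length = base.length) (hwfb : wfp base) :
    ∀ (l : List Int) (p : List Int) (acc : Option Int),
      (∀ i ∈ l, inR base i) → wfp p → p.length = base.length →
      (∀ y, inR base y → rootOf p y = rootOf base y) →
      ∃ pX, l.foldl (pvMaxStep sizeF) (some (acc, p)) = some
        (l.foldl (fun a i => pvOMax a (SizeAt sizeF (rootOf base i))) acc, pX) := by
  intro l
  induction l with
  | nil =>
    intro p acc _ _ _ _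
    exact ⟨p, rfl⟩
  | cons i l ih =>
    intro p acc hmem hwfp hplen hroots
    have hiB : inR base i := hmem i (by simp)
    have hip : inR p i := (inR_iff_of_len hplen i).2 hiB
    obtain ⟨p', hfind, hlen', hwf', hroots'⟩ := find_spec_len hwfp hip
    have hrooti : rootOf p i = rootOf base i := hroots i hiB
    have hrin : inR base (rootOf base i) := rootOf_inR hwfb hiB
    have hget : PySem.List.pyGet? sizeF (rootOf base i) = some (SizeAt sizeF (rootOf base i)) :=
      pyGet?_some_of_inR hrin.1 (by rw [hlen]; exact hrin.2)
    have hstep : pvMaxStep sizeF (some (acc, p)) i =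
        some (pvOMax acc (SizeAt sizeF (rootOf base i)), p') := by
      simp only [pvMaxStep]
      rw [hfind]
      dsimp only
      rw [hrooti, hget]
      cases acc <;> rfl
    rw [List.foldl_cons, hstep, List.foldl_cons]
    exact ih p' (pvOMax acc (SizeAt sizeF (rootOf base i))) (fun j hj => hmem j (by simp [hj]))
      hwf' (hlen'.trans hplen)
      (fun y hy => by
        rw [hroots' y ((inR_iff_of_len hplen y).2 hy)]
        exact hroots y hy)

theorem pv_main (nums : List Int) (hne : nums ≠ []) :
    largestComponentSize_approach4_optimized_union_find nums =
      largestComponentSize_approach4_optimized_union_find_alt nums := by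
  classical
  have hN : 0 < nums.length := List.length_pos_iff.mpr hne
  obtain ⟨cache, parentF, sizeF, firstF, hA, inv⟩ := main_inv nums nums.length le_rfl
  rw [List.take_length] at hA inv
  set N : Int := (nums.length : Int) with hNdef
  have hNpos : (0 : Int) < N := by rw [hNdef]; exact_mod_cast hN
  set comps := (nums.foldl pvStepB ([], false)).1 with hcompsdef
  set single := (nums.foldl pvStepB ([], false)).2 with hsingledef
  have hrange_mem : ∀ i ∈ PySem.List.pyRange 0 N 1, inR parentF i := by
    intro i hi
    rw [PySem.List.mem_pyRange_one] at hi
    exact ⟨hi.1, by rw [inv.lenp]; exact hi.2⟩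
  obtain ⟨pX, hmax⟩ := max_fold (by rw [inv.lens, inv.lenp]) inv.hwf (PySem.List.pyRange 0 N 1)
    parentF none hrange_mem inv.hwf rfl (fun y _ => rfl)
  have hcons : PySem.List.pyRange 0 N 1 = 0 :: PySem.List.pyRange 1 N 1 := by
    have h := PySem.List.pyRange_one_cons (a := 0) (b := N) hNpos
    simpa using h
  set AR : Int := (PySem.List.pyRange 1 N 1).foldl
    (fun b i => max b (SizeAt sizeF (rootOf parentF i))) (SizeAt sizeF (rootOf parentF 0)) with hARdef
  have hfoldval : (PySem.List.pyRange 0 N 1).foldl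
      (fun a i => pvOMax a (SizeAt sizeF (rootOf parentF i))) none = some AR := by
    rw [hcons, List.foldl_cons]
    show (PySem.List.pyRange 1 N 1).foldl
      (fun a i => pvOMax a (SizeAt sizeF (rootOf parentF i))) (some (SizeAt sizeF (rootOf parentF 0))) = some AR
    rw [omax_some]
  have hAeq : largestComponentSize_approach4_optimized_union_find nums =
      (match (PySem.List.enumerate nums 0).foldl pvStepA
        (some (PySem.Dict.empty, PySem.List.pyRange 0 N 1,
          PySem.List.pyRepeat [(1 : Int)] N, PySem.Dict.empty)) with
      | none => 0
      | some (_, parent, size, _) =>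
        match (PySem.List.pyRange 0 N 1).foldl (pvMaxStep size) (some ((none : Option Int), parent)) with
        | some (some b, _) => b
        | _ => 0) := rfl
  rw [hA] at hAeq
  dsimp only at hAeq
  rw [hmax, hfoldval] at hAeq
  have hAval : largestComponentSize_approach4_optimized_union_find nums = AR := hAeq
  -- classification of the per-index values
  have hval : ∀ i : Int, 0 ≤ i → i < N → (∃ c ∈ comps, SizeAt sizeF (rootOf parentF i) = c.2) ∨
      (SizeAt sizeF (rootOf parentF i) = 1 ∧ single = true) := by
    intro i h0 h1
    have hiN : i.toNat < nums.length := by omega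
    have hicast : ((i.toNat : Nat) : Int) = i := Int.toNat_of_nonneg h0
    by_cases he : Pfac nums i.toNat = []
    · right
      obtain ⟨hir, his, _⟩ := inv.emptyProc i.toNat hiN he
      rw [hicast] at hir his
      exact ⟨by rw [hir]; exact his, inv.singleIff.2 ⟨i.toNat, hiN, he⟩⟩
    · left
      obtain ⟨c, hcm, rc', hchar', hroot'⟩ := inv.cover i.toNat hiN he
      obtain ⟨hnec, _, rg, _, _, hszg, hcharg⟩ := inv.good c hcm
      have hrr : rc' = rg := pvChar_unique hnec hchar' hcharg
      rw [hicast] at hroot'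
      exact ⟨c, hcm, by rw [hroot', hrr]; exact hszg⟩
  have hcomp : ∀ c ∈ comps, ∃ i : Int, 0 ≤ i ∧ i < N ∧ SizeAt sizeF (rootOf parentF i) = c.2 := by
    intro c hcm
    obtain ⟨_, _, r, hrin, hroot, hsz, _⟩ := inv.good c hcm
    refine ⟨r, hrin.1, by rw [hNdef, ← inv.lenp]; exact hrin.2, ?_⟩
    rw [rootOf_eq_of_isRoot hroot]
    exact hsz
  have hsingle1 : single = true → ∃ i : Int, 0 ≤ i ∧ i < N ∧ SizeAt sizeF (rootOf parentF i) = 1 := by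
    intro hs
    obtain ⟨i, hiN, he⟩ := inv.singleIff.1 hs
    obtain ⟨hir, his, _⟩ := inv.emptyProc i hiN he
    exact ⟨(i : Int), by positivity, by rw [hNdef]; exact_mod_cast hiN, by rw [hir]; exact his⟩
  -- AR bounds
  have hARbounds := PySem.List.le_foldl_max_int (PySem.List.pyRange 1 N 1)
    (fun i => SizeAt sizeF (rootOf parentF i)) (SizeAt sizeF (rootOf parentF 0))
  have hfle : ∀ i : Int, 0 ≤ i → i < N → SizeAt sizeF (rootOf parentF i) ≤ AR := by
    intro i h0 h1
    by_cases hi0 : i = 0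
    · subst hi0
      exact hARbounds.1
    · exact hARbounds.2 i (PySem.List.mem_pyRange_one.2 ⟨by omega, h1⟩)
  have hARmap : AR = ((PySem.List.pyRange 1 N 1).map
      (fun i => SizeAt sizeF (rootOf parentF i))).foldl max (SizeAt sizeF (rootOf parentF 0)) := by
    rw [List.foldl_map]
  have hAR_attain : ∃ i : Int, 0 ≤ i ∧ i < N ∧ AR = SizeAt sizeF (rootOf parentF i) := by
    rcases PySem.List.foldl_max_mem ((PySem.List.pyRange 1 N 1).map
        (fun i => SizeAt sizeF (rootOf parentF i))) (SizeAt sizeF (rootOf parentF 0)) with h | h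
    · exact ⟨0, le_rfl, hNpos, by rw [hARmap]; exact h⟩
    · obtain ⟨i, hi, hv⟩ := List.mem_map.1 h
      rw [PySem.List.mem_pyRange_one] at hi
      exact ⟨i, by omega, hi.2, by rw [hARmap, ← hv]⟩
  -- B's value
  have hBval : largestComponentSize_approach4_optimized_union_find_alt nums =
      (if single then max (PySem.List.maxD (comps.map (fun c => c.2)) (fun x => x) 0) 1
       else PySem.List.maxD (comps.map (fun c => c.2)) (fun x => x) 0) := rfl
  rcases hcs : comps with _ | ⟨c0, t⟩
  · -- no components: every index is a singleton with no primes
    have hallone : ∀ i : Int, 0 ≤ i → i < N → SizeAt sizeF (rootOf parentF i) = 1 := by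
      intro i h0 h1
      rcases hval i h0 h1 with ⟨c, hcm, _⟩ | ⟨h, _⟩
      · rw [hcs] at hcm; cases hcm
      · exact h
    have hstrue : single = true := by
      rcases hval 0 le_rfl hNpos with ⟨c, hcm, _⟩ | ⟨_, hs⟩
      · rw [hcs] at hcm; cases hcm
      · exact hs
    have hARval : AR = 1 := by
      obtain ⟨i, h0, h1, hAR2⟩ := hAR_attain
      rw [hAR2, hallone i h0 h1]
    rw [hAval, hBval, hcs, hstrue, hARval]
    decide
  · -- at least one component
    have hmaxD : PySem.List.maxD (comps.map (fun c => c.2)) (fun x => x) 0 =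
        (t.map (fun c => c.2)).foldl max c0.2 := by
      rw [hcs]
      show PySem.List.maxD (c0.2 :: t.map (fun c => c.2)) (fun x => x) 0 = _
      unfold PySem.List.maxD
      rw [PySem.List.max?_id_cons]
      rfl
    set mB : Int := (t.map (fun c => c.2)).foldl max c0.2 with hmBdef
    have hvalsub : ∀ x ∈ comps.map (fun c => c.2), x ≤ mB := by
      rw [hcs]
      intro x hx
      rcases List.mem_cons.1 hx with rfl | hx
      · exact (PySem.List.le_foldl_max _ _).1
      · exact (PySem.List.le_foldl_max _ _).2 x hx
    have hmB_attain : ∃ c ∈ comps, mB = c.2 := by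
      rcases PySem.List.foldl_max_mem (t.map (fun c => c.2)) c0.2 with h | h
      · exact ⟨c0, by rw [hcs]; simp, h⟩
      · obtain ⟨c, hc, hcv⟩ := List.mem_map.1 h
        exact ⟨c, by rw [hcs]; simp [hc], hcv.symm⟩
    have hBval2 : largestComponentSize_approach4_optimized_union_find_alt nums =
        (if single then max mB 1 else mB) := by
      rw [hBval, hmaxD]
    have hmBleB : mB ≤ (if single then max mB 1 else mB) := by
      split_ifs
      · exact le_max_left _ _
      · exact le_rfl
    have hfleB : ∀ i : Int, 0 ≤ i → i < N →
        SizeAt sizeF (rootOf parentF i) ≤ (if single then max mB 1 else mB) := by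
      intro i h0 h1
      rcases hval i h0 h1 with ⟨c, hcm, hv⟩ | ⟨hv, hs⟩
      · rw [hv]
        exact le_trans (hvalsub _ (List.mem_map.2 ⟨c, hcm, rfl⟩)) hmBleB
      · rw [hv, if_pos hs]
        exact le_max_right _ _
    have hBleAR : (if single then max mB 1 else mB) ≤ AR := by
      have h1 : mB ≤ AR := by
        obtain ⟨c, hcm, hmBc⟩ := hmB_attain
        obtain ⟨i, h0, hi1, hfi⟩ := hcomp c hcm
        rw [hmBc, ← hfi]
        exact hfle i h0 hi1
      split_ifs with hs
      · obtain ⟨i, h0, hi1, hfi⟩ := hsingle1 hs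
        have h2 := hfle i h0 hi1
        rw [hfi] at h2
        exact max_le h1 h2
      · exact h1
    have hARleB : AR ≤ (if single then max mB 1 else mB) := by
      obtain ⟨i, h0, h1, hAR2⟩ := hAR_attain
      rw [hAR2]
      exact hfleB i h0 h1
    rw [hAval, hBval2]
    omega

-- ===== VERDICT (by name: the statement is the Claim_ definition above) =====
theorem largestComponentSize_approach4_optimized_union_find_spec :
    Claim_equal_largestComponentSize_approach4_optimized_union_find := by
  intro nums _ hpre
  unfold Spec_largestComponentSize_approach4_optimized_union_find
  exact pv_main nums hpre.1
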